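-- pv_equiv track=rewrite | github.com/geemaple/leetcode | leetcode/1298.maximum-candies-you-can-get-from-boxes.py | maxCandies
-- ===== SOURCE A (Python) =====
-- from typing import List
--
-- from collections import deque
--
-- def maxCandies(status: List[int], candies: List[int], keys: List[List[int]], containedBoxes: List[List[int]], initialBoxes: List[int]) -> int:
--     n = len(status)
--     res = 0
--     boxes = [False for i in range(n)]
--
--     q = deque()
--     for i in initialBoxes:
--         boxes[i] = True
--         if status[i]:
--             q.append(i)
--
--     while len(q) > 0:
--         cur = q.popleft()
--         res += candies[cur]
--
--         for neighbor in containedBoxes[cur]: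
--             if boxes[neighbor] and status[neighbor]:
--                 continue
--
--             boxes[neighbor] = True
--             if status[neighbor]:
--                 q.append(neighbor)
--
--         for neighbor in keys[cur]:
--             if boxes[neighbor] and status[neighbor]:
--                 continue
--
--             status[neighbor] = True
--             if boxes[neighbor]:
--                 q.append(neighbor)
--
--     return res
-- ===== SOURCE B (Python) =====
-- # Fixed-point formulation: boxes are received one by one (an open box is emptied on the spot),
-- # then full sweeps over all boxes run until a sweep empties nothing new (no BFS queue).
-- # The caller's `status` list is left unmodified.
-- def maxCandies(status, candies, keys, containedBoxes, initialBoxes):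
--     n = len(status)
--     opened = [bool(s) for s in status]
--     owned = [False] * n
--     emptied = [False] * n
--     total = 0
--
--     def empty(b):
--         nonlocal total
--         total += candies[b]
--         emptied[b] = True
--         for c in containedBoxes[b]:
--             owned[c] = True
--         for k in keys[b]:
--             opened[k] = True
--
--     for b in initialBoxes:
--         owned[b] = True
--         if status[b]:
--             empty(b)
--     swept = True
--     while swept:
--         swept = False
--         for b in range(n):
--             if owned[b] and opened[b] and not emptied[b]:
--                 empty(b)
--                 swept = True
--     return total
-- ===== Notes on version B (the rewrite author's own statement) =====
-- stated objective: alternative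
-- what changed: Replaces the BFS queue with a two-phase fixed-point saturation: boxes are received one by one (an open box is emptied on receipt), then boolean owned/opened/emptied arrays are rescanned in full passes until a pass empties nothing; status is copied instead of mutated; Pre_ admits well-shaped inputs (equal-length arrays, indices in range) plus trivial runs with all initial boxes closed, excluding ill-shaped inputs whose bad cells A happens never to reach.
-- outside the precondition, e.g. on maxCandies([1], [5, 6], [[]], [[]], [0]): A returns 5, B returns 5; on maxCandies([1], [5], [[], [7]], [[]], [0]): A returns 5, B returns 5
import Mathlib
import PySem

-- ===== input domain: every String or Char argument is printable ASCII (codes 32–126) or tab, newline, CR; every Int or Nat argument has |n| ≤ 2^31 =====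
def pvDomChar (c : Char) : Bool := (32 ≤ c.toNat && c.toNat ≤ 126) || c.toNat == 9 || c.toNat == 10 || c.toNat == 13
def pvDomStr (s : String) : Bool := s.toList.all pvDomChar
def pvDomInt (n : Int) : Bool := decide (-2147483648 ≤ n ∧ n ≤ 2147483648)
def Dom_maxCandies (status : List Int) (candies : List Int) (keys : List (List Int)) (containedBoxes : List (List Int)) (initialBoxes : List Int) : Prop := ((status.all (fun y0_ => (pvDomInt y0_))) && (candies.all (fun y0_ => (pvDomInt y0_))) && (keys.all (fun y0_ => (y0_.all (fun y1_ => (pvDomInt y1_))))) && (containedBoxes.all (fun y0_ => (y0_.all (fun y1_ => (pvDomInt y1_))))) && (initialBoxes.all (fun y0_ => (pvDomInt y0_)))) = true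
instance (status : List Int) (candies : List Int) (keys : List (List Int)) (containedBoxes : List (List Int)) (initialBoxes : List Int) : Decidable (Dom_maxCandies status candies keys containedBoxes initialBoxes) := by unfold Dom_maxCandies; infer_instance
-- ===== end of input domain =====

-- B replaces A's BFS queue with a fixed-point saturation over boolean arrays; equivalence is about
-- the RETURN value only (A mutates the `status` argument in place, B works on a copy).

-- Shared indexing primitives with Python's negative-index wraparound (exact for -n ≤ i < n,
-- which Pre_maxCandies guarantees for every index either version accesses; outside that range
-- Python raises IndexError — excluded by Pre_ — and these helpers read a default / do nothing).
def pvIdx (len : ℕ) (i : Int) : ℕ := if 0 ≤ i then i.toNat else (i + len).toNat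
def pvGetI (xs : List Int) (i : Int) : Int := xs.getD (pvIdx xs.length i) 0
def pvGetB (xs : List Bool) (i : Int) : Bool := xs.getD (pvIdx xs.length i) false
def pvGetL (xs : List (List Int)) (i : Int) : List Int := xs.getD (pvIdx xs.length i) []
def pvSetB (xs : List Bool) (i : Int) (v : Bool) : List Bool := xs.set (pvIdx xs.length i) v
def pvSetI (xs : List Int) (i : Int) (v : Int) : List Int := xs.set (pvIdx xs.length i) v

-- ===== PORT A =====
-- `for i in initialBoxes: boxes[i] = True; if status[i]: q.append(i)`
def aInit (status : List Int) : List Int → List Bool → List Int → (List Bool × List Int)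
  | [], boxes, q => (boxes, q)
  | i :: rest, boxes, q =>
      aInit status rest (pvSetB boxes i true)
        (if pvGetI status i ≠ 0 then q ++ [i] else q)

-- `for neighbor in containedBoxes[cur]: …`
def aCont (status : List Int) : List Int → List Bool → List Int → (List Bool × List Int)
  | [], boxes, q => (boxes, q)
  | nb :: rest, boxes, q =>
      if pvGetB boxes nb && decide (pvGetI status nb ≠ 0) then aCont status rest boxes q
      else
        aCont status rest (pvSetB boxes nb true)
          (if pvGetI status nb ≠ 0 then q ++ [nb] else q)

-- `for neighbor in keys[cur]: …`
def aKeys (boxes : List Bool) : List Int → List Int → List Int → (List Int × List Int)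
  | [], status, q => (status, q)
  | nb :: rest, status, q =>
      if pvGetB boxes nb && decide (pvGetI status nb ≠ 0) then aKeys boxes rest status q
      else
        aKeys boxes rest (pvSetI status nb 1)
          (if pvGetB boxes nb then q ++ [nb] else q)

-- `while len(q) > 0: …` — the `if hg : …` is a totality guard on the BFS potential only
-- (it always holds along real executions, as the equivalence proof shows).
def aLoop (cd : List Int) (ks cb : List (List Int)) (q : List Int) (boxes : List Bool)
    (status : List Int) (res : Int) : Int :=
  match q with
  | [] => res
  | cur :: qt =>
      if hg : (aKeys (aCont status (pvGetL cb cur) boxes qt).1 (pvGetL ks cur) status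
                 (aCont status (pvGetL cb cur) boxes qt).2).2.length
              + 2 * (aCont status (pvGetL cb cur) boxes qt).1.count false
              + 2 * (aKeys (aCont status (pvGetL cb cur) boxes qt).1 (pvGetL ks cur) status
                 (aCont status (pvGetL cb cur) boxes qt).2).1.countP (fun s => s == 0)
            < qt.length + 1 + 2 * boxes.count false + 2 * status.countP (fun s => s == 0) then
        aLoop cd ks cb
          (aKeys (aCont status (pvGetL cb cur) boxes qt).1 (pvGetL ks cur) status
            (aCont status (pvGetL cb cur) boxes qt).2).2
          (aCont status (pvGetL cb cur) boxes qt).1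
          (aKeys (aCont status (pvGetL cb cur) boxes qt).1 (pvGetL ks cur) status
            (aCont status (pvGetL cb cur) boxes qt).2).1
          (res + pvGetI cd cur)
      else res + pvGetI cd cur
termination_by q.length + 2 * boxes.count false + 2 * status.countP (fun s => s == 0)
decreasing_by simp only [List.length_cons]; omega

def maxCandies (status : List Int) (candies : List Int) (keys : List (List Int)) (containedBoxes : List (List Int)) (initialBoxes : List Int) : Int :=
  aLoop candies keys containedBoxes
    (aInit status initialBoxes (List.replicate status.length false) []).2
    (aInit status initialBoxes (List.replicate status.length false) []).1 status 0

-- ===== PORT B =====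
-- the receiving loop: `for b in initialBoxes: owned[b] = True; if status[b]: empty(b)`
-- (`empty(b)` = add candies, mark emptied, own the contents, open the keyed boxes)
def bSeed (st cd : List Int) (ks cb : List (List Int)) :
    List Int → List Bool → List Bool → List Bool → Int →
    (List Bool × List Bool × List Bool × Int)
  | [], opened, owned, emptied, total => (opened, owned, emptied, total)
  | i :: rest, opened, owned, emptied, total =>
      if pvGetI st i ≠ 0 then
        bSeed st cd ks cb rest
          ((pvGetL ks i).foldl (fun op k => pvSetB op k true) opened)
          ((pvGetL cb i).foldl (fun ow c => pvSetB ow c true) (pvSetB owned i true))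
          (pvSetB emptied i true)
          (total + pvGetI cd i)
      else
        bSeed st cd ks cb rest opened (pvSetB owned i true) emptied total

-- one iteration of `for b in range(n)`'s body
def bBody (cd : List Int) (ks cb : List (List Int))
    (st : List Bool × List Bool × List Bool × Int × Bool) (b : Nat) :
    List Bool × List Bool × List Bool × Int × Bool :=
  match st with
  | (opened, owned, collected, total, changed) =>
    if owned.getD b false && opened.getD b false && !(collected.getD b false) then
      ((ks.getD b []).foldl (fun op k => pvSetB op k true) opened,
       (cb.getD b []).foldl (fun ow c => pvSetB ow c true) owned,
       collected.set b true,
       total + cd.getD b 0,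
       true)
    else (opened, owned, collected, total, changed)

-- `changed = False; for b in range(n): …`
def bPass (cd : List Int) (ks cb : List (List Int)) (n : Nat)
    (opened owned collected : List Bool) (total : Int) :
    List Bool × List Bool × List Bool × Int × Bool :=
  (List.range n).foldl (bBody cd ks cb) (opened, owned, collected, total, false)

-- `while changed: …` — the `if hg : …` is a totality guard (a changed pass always collects a new
-- box, so the count of uncollected entries strictly drops; the proof below establishes that).
def bLoop (cd : List Int) (ks cb : List (List Int)) (n : Nat)
    (opened owned collected : List Bool) (total : Int) : Int :=
  if (bPass cd ks cb n opened owned collected total).2.2.2.2 then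
    if hg : (bPass cd ks cb n opened owned collected total).2.2.1.count false
            < collected.count false then
      bLoop cd ks cb n (bPass cd ks cb n opened owned collected total).1
        (bPass cd ks cb n opened owned collected total).2.1
        (bPass cd ks cb n opened owned collected total).2.2.1
        (bPass cd ks cb n opened owned collected total).2.2.2.1
    else (bPass cd ks cb n opened owned collected total).2.2.2.1
  else (bPass cd ks cb n opened owned collected total).2.2.2.1
termination_by collected.count false
decreasing_by exact hg

def maxCandies_alt (status : List Int) (candies : List Int) (keys : List (List Int)) (containedBoxes : List (List Int)) (initialBoxes : List Int) : Int :=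
  bLoop candies keys containedBoxes status.length
    (bSeed status candies keys containedBoxes initialBoxes
      (status.map (fun s => s != 0))
      (List.replicate status.length false) (List.replicate status.length false) 0).1
    (bSeed status candies keys containedBoxes initialBoxes
      (status.map (fun s => s != 0))
      (List.replicate status.length false) (List.replicate status.length false) 0).2.1
    (bSeed status candies keys containedBoxes initialBoxes
      (status.map (fun s => s != 0))
      (List.replicate status.length false) (List.replicate status.length false) 0).2.2.1
    (bSeed status candies keys containedBoxes initialBoxes
      (status.map (fun s => s != 0))
      (List.replicate status.length false) (List.replicate status.length false) 0).2.2.2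

-- ===== PRECONDITION & SPEC =====
-- Pre_ admits (a) well-shaped inputs — equal-length per-box arrays, every box index in [-n, n)
-- (Python indexing, including negative wraparound) — and (b) trivial runs, where every initial
-- box is a closed box so the BFS never starts and nothing else is accessed.  Indices outside
-- [-n, n) raise IndexError when A reaches them; other shapes whose bad cells A happens never to
-- reach are excluded (see the cited examples).
def PreWF_maxCandies (status : List Int) (candies : List Int) (keys : List (List Int)) (containedBoxes : List (List Int)) (initialBoxes : List Int) : Prop :=
  candies.length = status.length ∧ keys.length = status.length ∧
  containedBoxes.length = status.length ∧
  (∀ i ∈ initialBoxes, -(status.length : Int) ≤ i ∧ i < (status.length : Int)) ∧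
  (∀ l ∈ keys, ∀ i ∈ l, -(status.length : Int) ≤ i ∧ i < (status.length : Int)) ∧
  (∀ l ∈ containedBoxes, ∀ i ∈ l, -(status.length : Int) ≤ i ∧ i < (status.length : Int))

def PreTrivial_maxCandies (status : List Int) (candies : List Int) (keys : List (List Int)) (containedBoxes : List (List Int)) (initialBoxes : List Int) : Prop :=
  ∀ i ∈ initialBoxes, -(status.length : Int) ≤ i ∧ i < (status.length : Int) ∧
    status.getD (pvIdx status.length i) 0 = 0

def Pre_maxCandies (status : List Int) (candies : List Int) (keys : List (List Int)) (containedBoxes : List (List Int)) (initialBoxes : List Int) : Prop :=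
  PreWF_maxCandies status candies keys containedBoxes initialBoxes ∨
  PreTrivial_maxCandies status candies keys containedBoxes initialBoxes
instance (status : List Int) (candies : List Int) (keys : List (List Int)) (containedBoxes : List (List Int)) (initialBoxes : List Int) : Decidable (Pre_maxCandies status candies keys containedBoxes initialBoxes) := by unfold Pre_maxCandies PreWF_maxCandies PreTrivial_maxCandies; infer_instance

def pvWitness_maxCandies : List Int × List Int × List (List Int) × List (List Int) × List Int :=
  ([1, 0], [3, 4], [[1], []], [[], []], [0])

def Spec_maxCandies (status : List Int) (candies : List Int) (keys : List (List Int)) (containedBoxes : List (List Int)) (initialBoxes : List Int) (out : Int) : Prop := out = maxCandies_alt status candies keys containedBoxes initialBoxes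
instance (status : List Int) (candies : List Int) (keys : List (List Int)) (containedBoxes : List (List Int)) (initialBoxes : List Int) (out : Int) : Decidable (Spec_maxCandies status candies keys containedBoxes initialBoxes out) := by unfold Spec_maxCandies; infer_instance

-- ===== CLAIM (what is proved, stated in full; the proofs are below) =====
def Claim_equal_maxCandies : Prop := ∀ (status : List Int) (candies : List Int) (keys : List (List Int)) (containedBoxes : List (List Int)) (initialBoxes : List Int), Dom_maxCandies status candies keys containedBoxes initialBoxes → Pre_maxCandies status candies keys containedBoxes initialBoxes → Spec_maxCandies status candies keys containedBoxes initialBoxes (maxCandies status candies keys containedBoxes initialBoxes)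

-- ===== LEMMAS AND PROOFS =====

-- index arithmetic
lemma pvIdx_lt (len : ℕ) (x : Int) (h0 : -(len : Int) ≤ x) (h1 : x < (len : Int)) :
    pvIdx len x < len := by
  unfold pvIdx
  split_ifs <;> omega

-- membership through Python's index wraparound: some element of L denotes cell i
def WMem (n : ℕ) (L : List Int) (i : ℕ) : Prop := ∃ x ∈ L, pvIdx n x = i

lemma WMem_nil (n : ℕ) (i : ℕ) : ¬ WMem n [] i := by
  rintro ⟨x, hx, _⟩
  exact List.not_mem_nil hx

lemma WMem_cons (n : ℕ) (x : Int) (L : List Int) (i : ℕ) :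
    WMem n (x :: L) i ↔ pvIdx n x = i ∨ WMem n L i := by
  constructor
  · rintro ⟨y, hy, hw⟩
    rcases List.mem_cons.mp hy with rfl | hy'
    · exact Or.inl hw
    · exact Or.inr ⟨y, hy', hw⟩
  · rintro (h | ⟨y, hy, hw⟩)
    · exact ⟨x, List.mem_cons_self .., h⟩
    · exact ⟨y, List.mem_cons_of_mem _ hy, hw⟩

-- Abstract reachability notions (proof-only).
def OwnP (n : ℕ) (ib : List Int) (cb : List (List Int)) (F : Finset ℕ) (i : ℕ) : Prop :=
  WMem n ib i ∨ ∃ b ∈ F, WMem n (cb.getD b []) i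
def OpnP (st : List Int) (ks : List (List Int)) (F : Finset ℕ) (i : ℕ) : Prop :=
  st.getD i 0 ≠ 0 ∨ ∃ b ∈ F, WMem st.length (ks.getD b []) i
def ClosedP (st : List Int) (ib : List Int) (ks cb : List (List Int)) (F : Finset ℕ) : Prop :=
  ∀ i, i < st.length → OwnP st.length ib cb F i → OpnP st ks F i → i ∈ F

lemma OwnP_mono {n : ℕ} {ib : List Int} {cb : List (List Int)} {F G : Finset ℕ} {i : ℕ}
    (h : F ⊆ G) : OwnP n ib cb F i → OwnP n ib cb G i := by
  rintro (h1 | ⟨b, hb, hm⟩)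
  · exact Or.inl h1
  · exact Or.inr ⟨b, h hb, hm⟩

lemma OpnP_mono {st : List Int} {ks : List (List Int)} {F G : Finset ℕ} {i : ℕ}
    (h : F ⊆ G) : OpnP st ks F i → OpnP st ks G i := by
  rintro (h1 | ⟨b, hb, hm⟩)
  · exact Or.inl h1
  · exact Or.inr ⟨b, h hb, hm⟩

-- getD / set / count bookkeeping
lemma getD_replicate_false (n i : ℕ) : (List.replicate n false).getD i false = false := by
  rw [List.getD_eq_getElem?_getD]
  rcases Nat.lt_or_ge i n with h | h
  · rw [List.getElem?_eq_getElem (by simpa using h)]; simp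
  · rw [List.getElem?_eq_none (by simpa using h)]; rfl

lemma getD_set_self {α : Type} [Inhabited α] (xs : List α) (j : ℕ) (v d : α) (h : j < xs.length) :
    (xs.set j v).getD j d = v := by
  simp [List.getD, List.getElem?_set, h]

lemma getD_set_ne {α : Type} [Inhabited α] (xs : List α) (i j : ℕ) (v d : α) (h : i ≠ j) :
    (xs.set j v).getD i d = xs.getD i d := by
  simp [List.getD, List.getElem?_set, Ne.symm h]

lemma count_false_set_true (xs : List Bool) (j : ℕ) (h : j < xs.length) :
    xs.count false = (xs.set j true).count false + (if xs.getD j false = false then 1 else 0) := by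
  induction xs generalizing j with
  | nil => simp at h
  | cons a t ih =>
    cases j with
    | zero => cases a <;> simp [List.count_cons, List.getD]
    | succ m =>
      simp only [List.length_cons, Nat.succ_lt_succ_iff] at h
      have hrec := ih m h
      have hg : (a :: t).getD (m+1) false = t.getD m false := by simp [List.getD]
      simp only [List.set, List.count_cons, hg]
      split_ifs at hrec ⊢ <;> omega

lemma countZ_set_one (xs : List Int) (j : ℕ) (h : j < xs.length) :
    xs.countP (fun s => s == 0)
      = (xs.set j 1).countP (fun s => s == 0) + (if xs.getD j 0 = 0 then 1 else 0) := by
  induction xs generalizing j with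
  | nil => simp at h
  | cons a t ih =>
    cases j with
    | zero => by_cases ha : a = 0 <;> simp [List.countP_cons, List.getD, ha]
    | succ m =>
      simp only [List.length_cons, Nat.succ_lt_succ_iff] at h
      have hrec := ih m h
      have hg : (a :: t).getD (m+1) 0 = t.getD m 0 := by simp [List.getD]
      simp only [List.set, List.countP_cons, hg]
      split_ifs at hrec ⊢ <;> simp_all

-- ---------- A side ----------

lemma aInit_spec (status : List Int) (L : List Int) (boxes : List Bool) (q : List Int)
    (hL : ∀ x ∈ L, -(boxes.length : Int) ≤ x ∧ x < (boxes.length : Int)) :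
    (aInit status L boxes q).1.length = boxes.length ∧
    (∀ i : ℕ, ((aInit status L boxes q).1.getD i false = true ↔
        boxes.getD i false = true ∨ WMem boxes.length L i)) ∧
    (aInit status L boxes q).2 = q ++ L.filter (fun x => decide (pvGetI status x ≠ 0)) := by
  induction L generalizing boxes q with
  | nil =>
    refine ⟨rfl, fun i => ?_, by simp [aInit]⟩
    simp [aInit, WMem_nil]
  | cons x rest ih =>
    obtain ⟨hx0, hxlt⟩ := hL x (List.mem_cons_self ..)
    have hwlt : pvIdx boxes.length x < boxes.length := pvIdx_lt _ _ hx0 hxlt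
    have hset : pvSetB boxes x true = boxes.set (pvIdx boxes.length x) true := rfl
    have hL' : ∀ y ∈ rest, -((boxes.set (pvIdx boxes.length x) true).length : Int) ≤ y ∧
        y < ((boxes.set (pvIdx boxes.length x) true).length : Int) := by
      intro y hy; simpa using hL y (List.mem_cons_of_mem _ hy)
    obtain ⟨ih1, ih2, ih3⟩ :=
      ih (boxes.set (pvIdx boxes.length x) true) (if pvGetI status x ≠ 0 then q ++ [x] else q) hL'
    simp only [List.length_set] at ih1 ih2
    refine ⟨?_, ?_, ?_⟩
    · simp only [aInit, hset]; rw [ih1]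
    · intro i
      simp only [aInit, hset]
      rw [ih2 i, WMem_cons]
      by_cases hi : i = pvIdx boxes.length x
      · constructor
        · intro _; exact Or.inr (Or.inl hi.symm)
        · intro _; exact Or.inl (by rw [hi]; exact getD_set_self _ _ _ _ hwlt)
      · rw [getD_set_ne _ _ _ _ _ hi]
        have hi' : ¬ (pvIdx boxes.length x = i) := fun h => hi h.symm
        tauto
    · simp only [aInit, hset]
      rw [ih3]
      by_cases hc : pvGetI status x ≠ 0 <;>
        simp [hc, List.filter_cons, List.append_assoc]

lemma aCont_spec (status : List Int) (L : List Int) (boxes : List Bool) (q : List Int)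
    (hsl : status.length = boxes.length)
    (hL : ∀ x ∈ L, -(boxes.length : Int) ≤ x ∧ x < (boxes.length : Int)) :
    (aCont status L boxes q).1.length = boxes.length ∧
    (∀ i : ℕ, ((aCont status L boxes q).1.getD i false = true ↔
        boxes.getD i false = true ∨ WMem boxes.length L i)) ∧
    (∃ new : List Int, (aCont status L boxes q).2 = q ++ new ∧
        (∀ x ∈ new, x ∈ L) ∧
        (∀ i : ℕ, ((∃ x ∈ new, pvIdx boxes.length x = i) ↔
          (WMem boxes.length L i ∧ status.getD i 0 ≠ 0 ∧ boxes.getD i false = false))) ∧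
        (new.map (pvIdx boxes.length)).Nodup) ∧
    (aCont status L boxes q).2.length + 2 * (aCont status L boxes q).1.count false
      ≤ q.length + 2 * boxes.count false := by
  induction L generalizing boxes q with
  | nil =>
    refine ⟨rfl, fun i => by simp [aCont, WMem_nil],
      ⟨[], by simp [aCont], by simp, fun i => ?_, List.nodup_nil⟩, by simp [aCont]⟩
    simp [WMem_nil]
  | cons nb rest ih =>
    obtain ⟨h0, hlt⟩ := hL nb (List.mem_cons_self ..)
    have hwlt : pvIdx boxes.length nb < boxes.length := pvIdx_lt _ _ h0 hlt
    have hgB : pvGetB boxes nb = boxes.getD (pvIdx boxes.length nb) false := rfl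
    have hgI : pvGetI status nb = status.getD (pvIdx boxes.length nb) 0 := by
      unfold pvGetI; rw [hsl]
    by_cases hskip : boxes.getD (pvIdx boxes.length nb) false = true ∧
        status.getD (pvIdx boxes.length nb) 0 ≠ 0
    · have hcond : (pvGetB boxes nb && decide (pvGetI status nb ≠ 0)) = true := by
        rw [hgB, hgI, hskip.1, decide_eq_true hskip.2]; rfl
      have heq : aCont status (nb :: rest) boxes q = aCont status rest boxes q := by
        simp only [aCont, hcond, if_true]
      have hL' : ∀ y ∈ rest, -((boxes.length : ℕ) : Int) ≤ y ∧ y < ((boxes.length : ℕ) : Int) :=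
        fun y hy => hL y (List.mem_cons_of_mem _ hy)
      obtain ⟨ih1, ih2, ⟨new, hq, hsub, hmem, hnd⟩, ihm⟩ := ih boxes q hsl hL'
      refine ⟨by rw [heq]; exact ih1, ?_, ⟨new, by rw [heq]; exact hq,
        fun x hx => List.mem_cons_of_mem _ (hsub x hx), ?_, hnd⟩, by rw [heq]; exact ihm⟩
      · intro i
        rw [heq, ih2 i, WMem_cons]
        constructor
        · rintro (hb | hr)
          · exact Or.inl hb
          · exact Or.inr (Or.inr hr)
        · rintro (hb | (hw | hr))
          · exact Or.inl hb
          · exact Or.inl (by rw [← hw]; exact hskip.1)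
          · exact Or.inr hr
      · intro i
        rw [hmem i, WMem_cons]
        constructor
        · rintro ⟨hr, ht, hbf⟩; exact ⟨Or.inr hr, ht, hbf⟩
        · rintro ⟨hw | hr, ht, hbf⟩
          · exfalso
            rw [← hw, hskip.1] at hbf
            exact Bool.true_eq_false ▸ hbf
          · exact ⟨hr, ht, hbf⟩
    · have hcond : (pvGetB boxes nb && decide (pvGetI status nb ≠ 0)) = false := by
        rw [hgB, hgI]
        rcases Decidable.not_and_iff_not_or_not.mp hskip with h | h
        · rw [Bool.not_eq_true] at h; rw [h]; simp
        · rw [not_not.mp h]; simp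
      have heq : aCont status (nb :: rest) boxes q
          = aCont status rest (boxes.set (pvIdx boxes.length nb) true)
              (if pvGetI status nb ≠ 0 then q ++ [nb] else q) := by
        simp only [aCont, hcond, Bool.false_eq_true, if_false]
        rfl
      have hL' : ∀ y ∈ rest,
          -(((boxes.set (pvIdx boxes.length nb) true).length : ℕ) : Int) ≤ y ∧
            y < (((boxes.set (pvIdx boxes.length nb) true).length : ℕ) : Int) := by
        intro y hy; simpa using hL y (List.mem_cons_of_mem _ hy)
      obtain ⟨ih1, ih2, ⟨new, hq, hsub, hmem, hnd⟩, ihm⟩ :=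
        ih (boxes.set (pvIdx boxes.length nb) true)
          (if pvGetI status nb ≠ 0 then q ++ [nb] else q) (by simpa using hsl) hL'
      simp only [List.length_set] at ih1 ih2 hmem hnd
      have hsetself : (boxes.set (pvIdx boxes.length nb) true).getD (pvIdx boxes.length nb) false
          = true := getD_set_self _ _ _ _ hwlt
      refine ⟨by rw [heq, ih1], ?_, ?_, ?_⟩
      · intro i
        rw [heq, ih2 i, WMem_cons]
        by_cases hi : i = pvIdx boxes.length nb
        · constructor
          · intro _; exact Or.inr (Or.inl hi.symm)
          · intro _; exact Or.inl (by rw [hi]; exact hsetself)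
        · rw [getD_set_ne _ _ _ _ _ hi]
          have hi' : ¬ (pvIdx boxes.length nb = i) := fun h => hi h.symm
          tauto
      · by_cases ht : pvGetI status nb ≠ 0
        · have htc : status.getD (pvIdx boxes.length nb) 0 ≠ 0 := by rwa [hgI] at ht
          have hbf : boxes.getD (pvIdx boxes.length nb) false = false := by
            rcases Decidable.not_and_iff_not_or_not.mp hskip with h | h
            · exact Bool.not_eq_true _ ▸ h
            · exact absurd htc h
          refine ⟨nb :: new, ?_, ?_, ?_, ?_⟩
          · rw [heq, hq, if_pos ht]; simp
          · intro x hx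
            rcases List.mem_cons.mp hx with rfl | hx'
            · exact List.mem_cons_self ..
            · exact List.mem_cons_of_mem _ (hsub x hx')
          · intro i
            rw [WMem_cons]
            constructor
            · rintro ⟨x, hx, hwx⟩
              rcases List.mem_cons.mp hx with rfl | hx'
              · rw [← hwx]
                exact ⟨Or.inl rfl, htc, hbf⟩
              · obtain ⟨hwr, ht2, hbf2⟩ := (hmem i).mp ⟨x, hx', hwx⟩
                have hi : i ≠ pvIdx boxes.length nb := by
                  intro hc; rw [hc, hsetself] at hbf2; exact Bool.true_eq_false ▸ hbf2
                rw [getD_set_ne _ _ _ _ _ hi] at hbf2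
                exact ⟨Or.inr hwr, ht2, hbf2⟩
            · rintro ⟨hw | hr, ht2, hbf2⟩
              · exact ⟨nb, List.mem_cons_self .., hw⟩
              · by_cases hi : i = pvIdx boxes.length nb
                · exact ⟨nb, List.mem_cons_self .., hi.symm⟩
                · obtain ⟨x, hx', hwx⟩ := (hmem i).mpr
                    ⟨hr, ht2, by rw [getD_set_ne _ _ _ _ _ hi]; exact hbf2⟩
                  exact ⟨x, List.mem_cons_of_mem _ hx', hwx⟩
          · simp only [List.map_cons]
            refine List.Nodup.cons ?_ hnd
            intro hmemnb
            obtain ⟨x, hx, hwx⟩ := List.mem_map.mp hmemnb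
            obtain ⟨_, _, hbf2⟩ := (hmem _).mp ⟨x, hx, hwx⟩
            rw [hsetself] at hbf2
            exact Bool.true_eq_false ▸ hbf2
        · have htc : status.getD (pvIdx boxes.length nb) 0 = 0 := by
            rw [hgI] at ht; exact not_not.mp ht
          refine ⟨new, ?_, ?_, ?_, hnd⟩
          · rw [heq, hq, if_neg ht]
          · intro x hx
            exact List.mem_cons_of_mem _ (hsub x hx)
          · intro i
            rw [WMem_cons]
            constructor
            · rintro ⟨x, hx, hwx⟩
              obtain ⟨hwr, ht2, hbf2⟩ := (hmem i).mp ⟨x, hx, hwx⟩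
              have hi : i ≠ pvIdx boxes.length nb := by
                intro hc; rw [hc, hsetself] at hbf2; exact Bool.true_eq_false ▸ hbf2
              rw [getD_set_ne _ _ _ _ _ hi] at hbf2
              exact ⟨Or.inr hwr, ht2, hbf2⟩
            · rintro ⟨hw | hr, ht2, hbf2⟩
              · exfalso
                rw [← hw, htc] at ht2
                exact ht2 rfl
              · by_cases hi : i = pvIdx boxes.length nb
                · exfalso; rw [hi, htc] at ht2; exact ht2 rfl
                · exact (hmem i).mpr ⟨hr, ht2, by rw [getD_set_ne _ _ _ _ _ hi]; exact hbf2⟩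
      · have hcount := count_false_set_true boxes (pvIdx boxes.length nb) hwlt
        rw [heq]
        by_cases ht : pvGetI status nb ≠ 0
        · have htc : status.getD (pvIdx boxes.length nb) 0 ≠ 0 := by rwa [hgI] at ht
          have hbf : boxes.getD (pvIdx boxes.length nb) false = false := by
            rcases Decidable.not_and_iff_not_or_not.mp hskip with h | h
            · exact Bool.not_eq_true _ ▸ h
            · exact absurd htc h
          rw [hbf] at hcount
          simp at hcount
          rw [if_pos ht] at ihm ⊢
          have hql : (q ++ [nb]).length = q.length + 1 := by simp
          rw [hql] at ihm
          omega
        · rw [if_neg ht] at ihm ⊢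
          split_ifs at hcount <;> omega

lemma aKeys_spec (boxes : List Bool) (L : List Int) (status : List Int) (q : List Int)
    (hsl : boxes.length = status.length)
    (hL : ∀ x ∈ L, -(status.length : Int) ≤ x ∧ x < (status.length : Int)) :
    (aKeys boxes L status q).1.length = status.length ∧
    (∀ i : ℕ, ((aKeys boxes L status q).1.getD i 0 ≠ 0 ↔
        status.getD i 0 ≠ 0 ∨ WMem status.length L i)) ∧
    (∃ new : List Int, (aKeys boxes L status q).2 = q ++ new ∧
        (∀ x ∈ new, x ∈ L) ∧
        (∀ i : ℕ, ((∃ x ∈ new, pvIdx status.length x = i) ↔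
          (WMem status.length L i ∧ boxes.getD i false = true ∧ status.getD i 0 = 0))) ∧
        (new.map (pvIdx status.length)).Nodup) ∧
    (aKeys boxes L status q).2.length + 2 * (aKeys boxes L status q).1.countP (fun s => s == 0)
      ≤ q.length + 2 * status.countP (fun s => s == 0) := by
  induction L generalizing status q with
  | nil =>
    refine ⟨rfl, fun i => by simp [aKeys, WMem_nil],
      ⟨[], by simp [aKeys], by simp, fun i => ?_, List.nodup_nil⟩, by simp [aKeys]⟩
    simp [WMem_nil]
  | cons nb rest ih =>
    obtain ⟨h0, hlt⟩ := hL nb (List.mem_cons_self ..)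
    have hwlt : pvIdx status.length nb < status.length := pvIdx_lt _ _ h0 hlt
    have hgI : pvGetI status nb = status.getD (pvIdx status.length nb) 0 := rfl
    have hgB : pvGetB boxes nb = boxes.getD (pvIdx status.length nb) false := by
      unfold pvGetB; rw [hsl]
    by_cases hskip : boxes.getD (pvIdx status.length nb) false = true ∧
        status.getD (pvIdx status.length nb) 0 ≠ 0
    · have hcond : (pvGetB boxes nb && decide (pvGetI status nb ≠ 0)) = true := by
        rw [hgB, hgI, hskip.1, decide_eq_true hskip.2]; rfl
      have heq : aKeys boxes (nb :: rest) status q = aKeys boxes rest status q := by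
        simp only [aKeys, hcond, if_true]
      have hL' : ∀ y ∈ rest, -((status.length : ℕ) : Int) ≤ y ∧ y < ((status.length : ℕ) : Int) :=
        fun y hy => hL y (List.mem_cons_of_mem _ hy)
      obtain ⟨ih1, ih2, ⟨new, hq, hsub, hmem, hnd⟩, ihm⟩ := ih status q hsl hL'
      refine ⟨by rw [heq]; exact ih1, ?_, ⟨new, by rw [heq]; exact hq,
        fun x hx => List.mem_cons_of_mem _ (hsub x hx), ?_, hnd⟩, by rw [heq]; exact ihm⟩
      · intro i
        rw [heq, ih2 i, WMem_cons]
        constructor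
        · rintro (hb | hr)
          · exact Or.inl hb
          · exact Or.inr (Or.inr hr)
        · rintro (hb | (hw | hr))
          · exact Or.inl hb
          · exact Or.inl (by rw [← hw]; exact hskip.2)
          · exact Or.inr hr
      · intro i
        rw [hmem i, WMem_cons]
        constructor
        · rintro ⟨hr, hbx, hz⟩; exact ⟨Or.inr hr, hbx, hz⟩
        · rintro ⟨hw | hr, hbx, hz⟩
          · exfalso
            rw [← hw] at hz
            exact hskip.2 hz
          · exact ⟨hr, hbx, hz⟩
    · have hcond : (pvGetB boxes nb && decide (pvGetI status nb ≠ 0)) = false := by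
        rw [hgB, hgI]
        rcases Decidable.not_and_iff_not_or_not.mp hskip with h | h
        · rw [Bool.not_eq_true] at h; rw [h]; simp
        · rw [not_not.mp h]; simp
      have heq : aKeys boxes (nb :: rest) status q
          = aKeys boxes rest (status.set (pvIdx status.length nb) 1)
              (if pvGetB boxes nb then q ++ [nb] else q) := by
        simp only [aKeys, hcond, Bool.false_eq_true, if_false]
        rfl
      have hL' : ∀ y ∈ rest,
          -(((status.set (pvIdx status.length nb) 1).length : ℕ) : Int) ≤ y ∧
            y < (((status.set (pvIdx status.length nb) 1).length : ℕ) : Int) := by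
        intro y hy; simpa using hL y (List.mem_cons_of_mem _ hy)
      obtain ⟨ih1, ih2, ⟨new, hq, hsub, hmem, hnd⟩, ihm⟩ :=
        ih (status.set (pvIdx status.length nb) 1)
          (if pvGetB boxes nb then q ++ [nb] else q) (by simpa using hsl) hL'
      simp only [List.length_set] at ih1 ih2 hmem hnd
      have hsetself : (status.set (pvIdx status.length nb) 1).getD (pvIdx status.length nb) 0
          = 1 := getD_set_self _ _ _ _ hwlt
      refine ⟨by rw [heq, ih1], ?_, ?_, ?_⟩
      · intro i
        rw [heq, ih2 i, WMem_cons]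
        by_cases hi : i = pvIdx status.length nb
        · constructor
          · intro _; exact Or.inr (Or.inl hi.symm)
          · intro _
            refine Or.inl ?_
            rw [hi, hsetself]; exact one_ne_zero
        · rw [getD_set_ne _ _ _ _ _ hi]
          have hi' : ¬ (pvIdx status.length nb = i) := fun h => hi h.symm
          tauto
      · by_cases hb : pvGetB boxes nb = true
        · have hbc : boxes.getD (pvIdx status.length nb) false = true := by rwa [hgB] at hb
          have hz : status.getD (pvIdx status.length nb) 0 = 0 := by
            rcases Decidable.not_and_iff_not_or_not.mp hskip with h | h
            · exact absurd hbc h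
            · exact not_not.mp h
          refine ⟨nb :: new, ?_, ?_, ?_, ?_⟩
          · rw [heq, hq, if_pos hb]; simp
          · intro x hx
            rcases List.mem_cons.mp hx with rfl | hx'
            · exact List.mem_cons_self ..
            · exact List.mem_cons_of_mem _ (hsub x hx')
          · intro i
            rw [WMem_cons]
            constructor
            · rintro ⟨x, hx, hwx⟩
              rcases List.mem_cons.mp hx with rfl | hx'
              · rw [← hwx]
                exact ⟨Or.inl rfl, hbc, hz⟩
              · obtain ⟨hwr, hbx2, hz2⟩ := (hmem i).mp ⟨x, hx', hwx⟩
                have hi : i ≠ pvIdx status.length nb := by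
                  intro hc; rw [hc, hsetself] at hz2; exact one_ne_zero hz2
                rw [getD_set_ne _ _ _ _ _ hi] at hz2
                exact ⟨Or.inr hwr, hbx2, hz2⟩
            · rintro ⟨hw | hr, hbx2, hz2⟩
              · exact ⟨nb, List.mem_cons_self .., hw⟩
              · by_cases hi : i = pvIdx status.length nb
                · exact ⟨nb, List.mem_cons_self .., hi.symm⟩
                · obtain ⟨x, hx', hwx⟩ := (hmem i).mpr
                    ⟨hr, hbx2, by rw [getD_set_ne _ _ _ _ _ hi]; exact hz2⟩
                  exact ⟨x, List.mem_cons_of_mem _ hx', hwx⟩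
          · simp only [List.map_cons]
            refine List.Nodup.cons ?_ hnd
            intro hmemnb
            obtain ⟨x, hx, hwx⟩ := List.mem_map.mp hmemnb
            obtain ⟨_, _, hz2⟩ := (hmem _).mp ⟨x, hx, hwx⟩
            rw [hsetself] at hz2
            exact one_ne_zero hz2
        · have hbc : boxes.getD (pvIdx status.length nb) false = false := by
            rw [← hgB]; exact Bool.eq_false_iff.mpr hb
          refine ⟨new, ?_, ?_, ?_, hnd⟩
          · rw [heq, hq, if_neg hb]
          · intro x hx
            exact List.mem_cons_of_mem _ (hsub x hx)
          · intro i
            rw [WMem_cons]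
            constructor
            · rintro ⟨x, hx, hwx⟩
              obtain ⟨hwr, hbx2, hz2⟩ := (hmem i).mp ⟨x, hx, hwx⟩
              have hi : i ≠ pvIdx status.length nb := by
                intro hc; rw [hc, hsetself] at hz2; exact one_ne_zero hz2
              rw [getD_set_ne _ _ _ _ _ hi] at hz2
              exact ⟨Or.inr hwr, hbx2, hz2⟩
            · rintro ⟨hw | hr, hbx2, hz2⟩
              · exfalso
                rw [← hw, hbc] at hbx2
                exact Bool.false_ne_true hbx2
              · by_cases hi : i = pvIdx status.length nb
                · exfalso; rw [hi, hbc] at hbx2; exact Bool.false_ne_true hbx2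
                · exact (hmem i).mpr ⟨hr, hbx2, by rw [getD_set_ne _ _ _ _ _ hi]; exact hz2⟩
      · have hcount := countZ_set_one status (pvIdx status.length nb) hwlt
        rw [heq]
        by_cases hb : pvGetB boxes nb = true
        · have hbc : boxes.getD (pvIdx status.length nb) false = true := by rwa [hgB] at hb
          have hz : status.getD (pvIdx status.length nb) 0 = 0 := by
            rcases Decidable.not_and_iff_not_or_not.mp hskip with h | h
            · exact absurd hbc h
            · exact not_not.mp h
          rw [hz] at hcount
          simp at hcount
          rw [if_pos hb] at ihm ⊢
          have hql : (q ++ [nb]).length = q.length + 1 := by simp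
          rw [hql] at ihm
          omega
        · rw [if_neg hb] at ihm ⊢
          split_ifs at hcount <;> omega

lemma OwnP_insert (n : ℕ) (ib : List Int) (cb : List (List Int)) (D : Finset ℕ) (c i : ℕ) :
    OwnP n ib cb (insert c D) i ↔ OwnP n ib cb D i ∨ WMem n (cb.getD c []) i := by
  unfold OwnP
  constructor
  · rintro (h | ⟨b, hb, hm⟩)
    · exact Or.inl (Or.inl h)
    · rcases Finset.mem_insert.mp hb with rfl | hb'
      · exact Or.inr hm
      · exact Or.inl (Or.inr ⟨b, hb', hm⟩)
  · rintro ((h | ⟨b, hb, hm⟩) | h)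
    · exact Or.inl h
    · exact Or.inr ⟨b, Finset.mem_insert_of_mem hb, hm⟩
    · exact Or.inr ⟨c, Finset.mem_insert_self .., h⟩

lemma OpnP_insert (st : List Int) (ks : List (List Int)) (D : Finset ℕ) (c i : ℕ) :
    OpnP st ks (insert c D) i ↔ OpnP st ks D i ∨ WMem st.length (ks.getD c []) i := by
  unfold OpnP
  constructor
  · rintro (h | ⟨b, hb, hm⟩)
    · exact Or.inl (Or.inl h)
    · rcases Finset.mem_insert.mp hb with rfl | hb'
      · exact Or.inr hm
      · exact Or.inl (Or.inr ⟨b, hb', hm⟩)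
  · rintro ((h | ⟨b, hb, hm⟩) | h)
    · exact Or.inl h
    · exact Or.inr ⟨b, Finset.mem_insert_of_mem hb, hm⟩
    · exact Or.inr ⟨c, Finset.mem_insert_self .., h⟩

-- the BFS loop invariant
def InvA (st cd : List Int) (ks cb : List (List Int)) (ib : List Int)
    (D : Finset ℕ) (q : List Int) (boxes : List Bool) (status : List Int) : Prop :=
  boxes.length = st.length ∧ status.length = st.length ∧
  (∀ i : ℕ, i < st.length → (boxes.getD i false = true ↔ OwnP st.length ib cb D i)) ∧
  (∀ i : ℕ, i < st.length → (status.getD i 0 ≠ 0 ↔ OpnP st ks D i)) ∧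
  (∀ x ∈ q, -(st.length : Int) ≤ x ∧ x < (st.length : Int) ∧
      ((pvIdx st.length x ∉ D ∧ OwnP st.length ib cb D (pvIdx st.length x) ∧
          OpnP st ks D (pvIdx st.length x)) ∨
        pvIdx st.length x ∈ D)) ∧
  (∀ i : ℕ, i < st.length → i ∉ D → OwnP st.length ib cb D i → OpnP st ks D i →
      ∃ x ∈ q, pvIdx st.length x = i) ∧
  (∀ F, ClosedP st ib ks cb F → D ⊆ F) ∧
  (∀ b ∈ D, b < st.length) ∧
  (∀ b ∈ D, OwnP st.length ib cb D b ∧ OpnP st ks D b)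

lemma aLoop_nil_total (st cd : List Int) (ks cb : List (List Int)) (ib : List Int)
    (boxes : List Bool) (status : List Int) (res : Int) (D : Finset ℕ)
    (hinv : InvA st cd ks cb ib D [] boxes status) :
    ∃ C : Finset ℕ, ClosedP st ib ks cb C ∧ (∀ F, ClosedP st ib ks cb F → C ⊆ F) ∧
      aLoop cd ks cb [] boxes status res
        = res + (([] : List Int).map (fun x => cd.getD (pvIdx st.length x) 0)).sum
          + ∑ c ∈ C \ (D ∪ (([] : List Int).map (pvIdx st.length)).toFinset), cd.getD c 0 := by
  obtain ⟨_, _, _, _, _, hcov, hmin, _, _⟩ := hinv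
  refine ⟨D, ?_, hmin, ?_⟩
  · intro i hi hOwn hOpn
    by_contra hiD
    obtain ⟨x, hx, _⟩ := hcov i hi hiD hOwn hOpn
    exact List.not_mem_nil hx
  · rw [aLoop.eq_def]
    simp

lemma aLoop_spec (st cd : List Int) (ks cb : List (List Int)) (ib : List Int)
    (hks : ks.length = st.length) (hcb : cb.length = st.length)
    (hcd : cd.length = st.length)
    (hkr : ∀ l ∈ ks, ∀ x ∈ l, -(st.length : Int) ≤ x ∧ x < (st.length : Int))
    (hcr : ∀ l ∈ cb, ∀ x ∈ l, -(st.length : Int) ≤ x ∧ x < (st.length : Int)) :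
    ∀ (M : ℕ) (q : List Int) (boxes : List Bool) (status : List Int) (res : Int) (D : Finset ℕ),
      q.length + 2 * boxes.count false + 2 * status.countP (fun s => s == 0) ≤ M →
      InvA st cd ks cb ib D q boxes status →
      ∃ C : Finset ℕ, ClosedP st ib ks cb C ∧ (∀ F, ClosedP st ib ks cb F → C ⊆ F) ∧
        aLoop cd ks cb q boxes status res
          = res + (q.map (fun x => cd.getD (pvIdx st.length x) 0)).sum
            + ∑ c ∈ C \ (D ∪ (q.map (pvIdx st.length)).toFinset), cd.getD c 0 := by
  intro M
  induction M with
  | zero =>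
    intro q boxes status res D hM hinv
    have hq0 : q = [] := List.length_eq_zero_iff.mp (by omega)
    subst hq0
    exact aLoop_nil_total st cd ks cb ib boxes status res D hinv
  | succ M ihM =>
    intro q boxes status res D hM hinv
    match q with
    | [] => exact aLoop_nil_total st cd ks cb ib boxes status res D hinv
    | cur :: qt =>
      obtain ⟨hbl, hsl, hbc, hsc, hq, hcov, hmin, hDlt, hDready⟩ := hinv
      obtain ⟨hc0, hclt, hcf⟩ := hq cur (List.mem_cons_self ..)
      -- the two neighbour lists
      have hL1eq : pvGetL cb cur = cb.getD (pvIdx st.length cur) [] := by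
        unfold pvGetL; rw [hcb]
      have hL2eq : pvGetL ks cur = ks.getD (pvIdx st.length cur) [] := by
        unfold pvGetL; rw [hks]
      have hcwlt : pvIdx st.length cur < st.length := pvIdx_lt _ _ hc0 hclt
      have hL1r : ∀ x ∈ pvGetL cb cur, -(st.length : Int) ≤ x ∧ x < (st.length : Int) := by
        intro x hx
        rw [hL1eq] at hx
        have hlt' : pvIdx st.length cur < cb.length := by omega
        have : cb.getD (pvIdx st.length cur) [] ∈ cb := by
          rw [List.getD_eq_getElem?_getD, List.getElem?_eq_getElem hlt']
          exact List.getElem_mem _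
        exact hcr _ this x hx
      have hL2r : ∀ x ∈ pvGetL ks cur, -(st.length : Int) ≤ x ∧ x < (st.length : Int) := by
        intro x hx
        rw [hL2eq] at hx
        have hlt' : pvIdx st.length cur < ks.length := by omega
        have : ks.getD (pvIdx st.length cur) [] ∈ ks := by
          rw [List.getD_eq_getElem?_getD, List.getElem?_eq_getElem hlt']
          exact List.getElem_mem _
        exact hkr _ this x hx
      obtain ⟨c1, c2, ⟨new1, hq1, hsub1, hm1, hnd1⟩, cm1⟩ :=
        aCont_spec status (pvGetL cb cur) boxes qt (hsl.trans hbl.symm)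
          (by rw [hbl]; exact hL1r)
      rw [hbl] at c2 hm1 hnd1
      obtain ⟨k1, k2, ⟨new2, hq2, hsub2, hm2, hnd2⟩, km2⟩ :=
        aKeys_spec (aCont status (pvGetL cb cur) boxes qt).1 (pvGetL ks cur) status
          (aCont status (pvGetL cb cur) boxes qt).2 (c1.trans (hbl.trans hsl.symm))
          (by rw [hsl]; exact hL2r)
      rw [hsl] at k2 hm2 hnd2
      set boxes' := (aCont status (pvGetL cb cur) boxes qt).1 with hb'def
      set p12 := (aCont status (pvGetL cb cur) boxes qt).2 with hp12def
      set status' := (aKeys boxes' (pvGetL ks cur) status p12).1 with hs'def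
      set q'' := (aKeys boxes' (pvGetL ks cur) status p12).2 with hq''def
      have hq''eq : q'' = qt ++ (new1 ++ new2) := by
        rw [hq2, hq1, List.append_assoc]
      have hcget : pvGetI cd cur = cd.getD (pvIdx st.length cur) 0 := by
        unfold pvGetI; rw [hcd]
      -- measure decrease and unfolding (common to both cases)
      have hg : q''.length + 2 * boxes'.count false + 2 * status'.countP (fun s => s == 0)
          < qt.length + 1 + 2 * boxes.count false + 2 * status.countP (fun s => s == 0) := by
        have h1 := cm1
        have h2 := km2
        omega
      have hunf : aLoop cd ks cb (cur :: qt) boxes status res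
          = aLoop cd ks cb q'' boxes' status' (res + pvGetI cd cur) := by
        rw [aLoop.eq_def]
        simp only []
        rw [dif_pos hg]
      rw [hunf]
      rcases hcf with ⟨hcD, hcOwn, hcOpn⟩ | hcDin
      · -- FRESH head: collect cur's cell
        set D' := insert (pvIdx st.length cur) D with hD'def
        have hOwn' : ∀ i : ℕ, OwnP st.length ib cb D' i ↔
            OwnP st.length ib cb D i ∨ WMem st.length (pvGetL cb cur) i := by
          intro i; rw [hL1eq]; exact OwnP_insert st.length ib cb D (pvIdx st.length cur) i
        have hOpn' : ∀ i : ℕ, OpnP st ks D' i ↔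
            OpnP st ks D i ∨ WMem st.length (pvGetL ks cur) i := by
          intro i; rw [hL2eq]; exact OpnP_insert st ks D (pvIdx st.length cur) i
        -- the new invariant
        have hinv' : InvA st cd ks cb ib D' q'' boxes' status' := by
          refine ⟨c1.trans hbl, k1.trans hsl, ?_, ?_, ?_, ?_, ?_, ?_, ?_⟩
          · intro i hi
            rw [c2 i, hbc i hi, hOwn' i]
          · intro i hi
            rw [k2 i, hsc i hi, hOpn' i]
          · -- queue elements
            intro x hx
            rw [hq''eq] at hx
            rcases List.mem_append.mp hx with hxq | hxn
            · obtain ⟨e0, e1, ef⟩ := hq x (List.mem_cons_of_mem _ hxq)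
              refine ⟨e0, e1, ?_⟩
              rcases ef with ⟨e2, e3, e4⟩ | emem
              · by_cases hxc : pvIdx st.length x = pvIdx st.length cur
                · exact Or.inr (by rw [hxc, hD'def]; exact Finset.mem_insert_self ..)
                · refine Or.inl ⟨?_, OwnP_mono (Finset.subset_insert _ _) e3,
                    OpnP_mono (Finset.subset_insert _ _) e4⟩
                  rw [hD'def, Finset.mem_insert]
                  push_neg
                  exact ⟨hxc, e2⟩
              · exact Or.inr (Finset.mem_insert_of_mem emem)
            rcases List.mem_append.mp hxn with hx1 | hx2
            · obtain ⟨e1, e2, e3⟩ := (hm1 (pvIdx st.length x)).mp ⟨x, hx1, rfl⟩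
              obtain ⟨f0, f1⟩ := hL1r x (hsub1 x hx1)
              have hwlt : pvIdx st.length x < st.length := pvIdx_lt _ _ f0 f1
              have hOpnD : OpnP st ks D (pvIdx st.length x) := (hsc _ hwlt).mp e2
              have hxne : pvIdx st.length x ≠ pvIdx st.length cur := by
                intro hc
                have := (hbc _ hcwlt).mpr hcOwn
                rw [← hc, e3] at this
                exact Bool.false_ne_true this
              have hxD : pvIdx st.length x ∉ D := by
                intro hc
                have := (hbc _ hwlt).mpr (hDready _ hc).1
                rw [e3] at this
                exact Bool.false_ne_true this
              refine ⟨f0, f1, Or.inl ⟨?_, ?_, OpnP_mono (Finset.subset_insert _ _) hOpnD⟩⟩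
              · rw [hD'def, Finset.mem_insert]; push_neg; exact ⟨hxne, hxD⟩
              · rw [hOwn' _]
                exact Or.inr e1
            · obtain ⟨e1, e2, e3⟩ := (hm2 (pvIdx st.length x)).mp ⟨x, hx2, rfl⟩
              obtain ⟨f0, f1⟩ := hL2r x (hsub2 x hx2)
              have hwlt : pvIdx st.length x < st.length := pvIdx_lt _ _ f0 f1
              have hnOpnD : ¬ OpnP st ks D (pvIdx st.length x) := by
                intro hc
                exact absurd e3 ((hsc _ hwlt).mpr hc)
              have hxne : pvIdx st.length x ≠ pvIdx st.length cur := fun hc =>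
                hnOpnD (hc ▸ hcOpn)
              have hxD : pvIdx st.length x ∉ D := fun hc => hnOpnD (hDready _ hc).2
              refine ⟨f0, f1, Or.inl ⟨?_, ?_, ?_⟩⟩
              · rw [hD'def, Finset.mem_insert]; push_neg; exact ⟨hxne, hxD⟩
              · rw [hOwn' _]
                rcases (c2 _).mp e2 with hbx | hlx
                · exact Or.inl ((hbc _ hwlt).mp hbx)
                · exact Or.inr hlx
              · rw [hOpn' _]
                exact Or.inr e1
          · -- coverage
            intro i hi hiD' hOwni hOpni
            rw [hq''eq]
            have hiD : i ∉ D := fun hc => hiD' (Finset.mem_insert_of_mem hc)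
            have hicur : i ≠ pvIdx st.length cur := fun hc =>
              hiD' (by rw [hc]; exact Finset.mem_insert_self ..)
            by_cases hOD : OwnP st.length ib cb D i
            · by_cases hPD : OpnP st ks D i
              · obtain ⟨x, hxq, hwx⟩ := hcov i hi hiD hOD hPD
                rcases List.mem_cons.mp hxq with rfl | hx
                · exact absurd hwx.symm hicur
                · exact ⟨x, List.mem_append.mpr (Or.inl hx), hwx⟩
              · have hiL2 : WMem st.length (pvGetL ks cur) i := by
                  rcases (hOpn' i).mp hOpni with h | h
                  · exact absurd h hPD
                  · exact h
                have hz : status.getD i 0 = 0 := by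
                  by_contra hz
                  exact hPD ((hsc i hi).mp hz)
                have hbx : boxes'.getD i false = true := (c2 i).mpr (Or.inl ((hbc i hi).mpr hOD))
                obtain ⟨x, hx2, hwx⟩ := (hm2 i).mpr ⟨hiL2, hbx, hz⟩
                exact ⟨x, List.mem_append.mpr (Or.inr (List.mem_append.mpr (Or.inr hx2))), hwx⟩
            · have hiL1 : WMem st.length (pvGetL cb cur) i := by
                rcases (hOwn' i).mp hOwni with h | h
                · exact absurd h hOD
                · exact h
              have hbf : boxes.getD i false = false := by
                cases hb : boxes.getD i false with
                | false => rfl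
                | true => exact absurd ((hbc i hi).mp hb) hOD
              by_cases hPD : OpnP st ks D i
              · have ht : status.getD i 0 ≠ 0 := (hsc i hi).mpr hPD
                obtain ⟨x, hx1, hwx⟩ := (hm1 i).mpr ⟨hiL1, ht, hbf⟩
                exact ⟨x, List.mem_append.mpr (Or.inr (List.mem_append.mpr (Or.inl hx1))), hwx⟩
              · have hiL2 : WMem st.length (pvGetL ks cur) i := by
                  rcases (hOpn' i).mp hOpni with h | h
                  · exact absurd h hPD
                  · exact h
                have hz : status.getD i 0 = 0 := by
                  by_contra hz
                  exact hPD ((hsc i hi).mp hz)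
                have hbx : boxes'.getD i false = true := (c2 i).mpr (Or.inr hiL1)
                obtain ⟨x, hx2, hwx⟩ := (hm2 i).mpr ⟨hiL2, hbx, hz⟩
                exact ⟨x, List.mem_append.mpr (Or.inr (List.mem_append.mpr (Or.inr hx2))), hwx⟩
          · -- minimality
            intro F hF
            rw [hD'def]
            refine Finset.insert_subset ?_ (hmin F hF)
            exact hF (pvIdx st.length cur) hcwlt (OwnP_mono (hmin F hF) hcOwn)
              (OpnP_mono (hmin F hF) hcOpn)
          · intro b hb
            rcases Finset.mem_insert.mp hb with rfl | hb'
            · exact hcwlt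
            · exact hDlt b hb'
          · intro b hb
            rcases Finset.mem_insert.mp hb with rfl | hb'
            · exact ⟨OwnP_mono (Finset.subset_insert _ _) hcOwn,
                OpnP_mono (Finset.subset_insert _ _) hcOpn⟩
            · obtain ⟨u, v⟩ := hDready b hb'
              exact ⟨OwnP_mono (Finset.subset_insert _ _) u,
                OpnP_mono (Finset.subset_insert _ _) v⟩
        obtain ⟨C, hC1, hC2, hC3⟩ := ihM q'' boxes' status' (res + pvGetI cd cur) D'
          (by simp only [List.length_cons] at hM; omega) hinv'
        refine ⟨C, hC1, hC2, ?_⟩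
        rw [hC3]
        have hDC : D ⊆ C := hmin C hC1
        have hc0C : pvIdx st.length cur ∈ C :=
          hC1 _ hcwlt (OwnP_mono hDC hcOwn) (OpnP_mono hDC hcOpn)
        have hD'C : D' ⊆ C := by
          rw [hD'def]
          exact Finset.insert_subset hc0C hDC
        have hA' : D' ∪ (q''.map (pvIdx st.length)).toFinset
            = (D ∪ ((cur :: qt).map (pvIdx st.length)).toFinset)
              ∪ ((new1.map (pvIdx st.length)).toFinset
                  ∪ (new2.map (pvIdx st.length)).toFinset) := by
          rw [hq''eq, hD'def]
          ext a
          simp only [List.map_cons, List.map_append, List.toFinset_cons, List.toFinset_append,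
            Finset.mem_union, Finset.mem_insert]
          tauto
        have hqtcell : ∀ i : ℕ, i ∈ (qt.map (pvIdx st.length)).toFinset →
            boxes.getD i false = true ∧ status.getD i 0 ≠ 0 := by
          intro i hi
          obtain ⟨x, hxq, hwx⟩ := List.mem_map.mp (List.mem_toFinset.mp hi)
          obtain ⟨e0, e1, ef⟩ := hq x (List.mem_cons_of_mem _ hxq)
          have hiwlt : i < st.length := by rw [← hwx]; exact pvIdx_lt _ _ e0 e1
          have hOO : OwnP st.length ib cb D i ∧ OpnP st ks D i := by
            rcases ef with ⟨_, ho, hp⟩ | hmem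
            · exact ⟨hwx ▸ ho, hwx ▸ hp⟩
            · exact hwx ▸ hDready _ hmem
          exact ⟨(hbc i hiwlt).mpr hOO.1, (hsc i hiwlt).mpr hOO.2⟩
        have hn1 : ∀ i : ℕ, i ∈ (new1.map (pvIdx st.length)).toFinset →
            i ∈ C \ (D ∪ ((cur :: qt).map (pvIdx st.length)).toFinset) := by
          intro i hi
          obtain ⟨y, hy, hwy⟩ := List.mem_map.mp (List.mem_toFinset.mp hi)
          obtain ⟨e1, e2, e3⟩ := (hm1 i).mp ⟨y, hy, hwy⟩
          obtain ⟨f0, f1⟩ := hL1r y (hsub1 y hy)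
          have hiwlt : i < st.length := by rw [← hwy]; exact pvIdx_lt _ _ f0 f1
          have hiC : i ∈ C := by
            refine hC1 i hiwlt ?_ (OpnP_mono hDC ((hsc i hiwlt).mp e2))
            refine Or.inr ⟨pvIdx st.length cur, hc0C, ?_⟩
            rw [← hL1eq]
            exact e1
          refine Finset.mem_sdiff.mpr ⟨hiC, ?_⟩
          rw [Finset.mem_union, List.map_cons, List.toFinset_cons, Finset.mem_insert]
          push_neg
          refine ⟨?_, ?_, ?_⟩
          · intro hc
            have := (hbc _ hiwlt).mpr (hDready _ hc).1
            rw [e3] at this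
            exact Bool.false_ne_true this
          · intro hc
            have := (hbc _ hcwlt).mpr hcOwn
            rw [← hc, e3] at this
            exact Bool.false_ne_true this
          · intro hc
            have := (hqtcell i hc).1
            rw [e3] at this
            exact Bool.false_ne_true this
        have hn2 : ∀ i : ℕ, i ∈ (new2.map (pvIdx st.length)).toFinset →
            i ∈ C \ (D ∪ ((cur :: qt).map (pvIdx st.length)).toFinset) := by
          intro i hi
          obtain ⟨y, hy, hwy⟩ := List.mem_map.mp (List.mem_toFinset.mp hi)
          obtain ⟨e1, e2, e3⟩ := (hm2 i).mp ⟨y, hy, hwy⟩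
          obtain ⟨f0, f1⟩ := hL2r y (hsub2 y hy)
          have hiwlt : i < st.length := by rw [← hwy]; exact pvIdx_lt _ _ f0 f1
          have hiC : i ∈ C := by
            refine hC1 i hiwlt ?_ ?_
            · rcases (c2 i).mp e2 with hbx | hlx
              · exact OwnP_mono hDC ((hbc i hiwlt).mp hbx)
              · refine Or.inr ⟨pvIdx st.length cur, hc0C, ?_⟩
                rw [← hL1eq]
                exact hlx
            · refine Or.inr ⟨pvIdx st.length cur, hc0C, ?_⟩
              rw [← hL2eq]
              exact e1
          refine Finset.mem_sdiff.mpr ⟨hiC, ?_⟩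
          rw [Finset.mem_union, List.map_cons, List.toFinset_cons, Finset.mem_insert]
          push_neg
          refine ⟨?_, ?_, ?_⟩
          · intro hc
            exact ((hsc _ hiwlt).mpr (hDready _ hc).2) e3
          · intro hc
            exact ((hsc _ hiwlt).mpr (hc ▸ hcOpn)) e3
          · intro hc
            exact (hqtcell i hc).2 e3
        have hNsub : ((new1.map (pvIdx st.length)).toFinset
              ∪ (new2.map (pvIdx st.length)).toFinset)
            ⊆ C \ (D ∪ ((cur :: qt).map (pvIdx st.length)).toFinset) := by
          intro i hi
          rcases Finset.mem_union.mp hi with h | h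
          · exact hn1 i h
          · exact hn2 i h
        have hd12 : Disjoint (new1.map (pvIdx st.length)).toFinset
            (new2.map (pvIdx st.length)).toFinset := by
          rw [Finset.disjoint_left]
          intro i h1 h2
          obtain ⟨y, hy, hwy⟩ := List.mem_map.mp (List.mem_toFinset.mp h1)
          obtain ⟨z, hz, hwz⟩ := List.mem_map.mp (List.mem_toFinset.mp h2)
          obtain ⟨_, e2, _⟩ := (hm1 i).mp ⟨y, hy, hwy⟩
          obtain ⟨_, _, e3⟩ := (hm2 i).mp ⟨z, hz, hwz⟩
          exact e2 e3
        have hsdiff : (∑ c ∈ C \ (D' ∪ (q''.map (pvIdx st.length)).toFinset), cd.getD c 0)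
              + ∑ c ∈ ((new1.map (pvIdx st.length)).toFinset
                  ∪ (new2.map (pvIdx st.length)).toFinset), cd.getD c 0
            = ∑ c ∈ C \ (D ∪ ((cur :: qt).map (pvIdx st.length)).toFinset), cd.getD c 0 := by
          rw [hA']
          have hre : C \ ((D ∪ ((cur :: qt).map (pvIdx st.length)).toFinset)
                ∪ ((new1.map (pvIdx st.length)).toFinset
                    ∪ (new2.map (pvIdx st.length)).toFinset))
              = (C \ (D ∪ ((cur :: qt).map (pvIdx st.length)).toFinset))
                \ ((new1.map (pvIdx st.length)).toFinset
                    ∪ (new2.map (pvIdx st.length)).toFinset) := by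
            ext a
            simp only [Finset.mem_sdiff, Finset.mem_union]
            tauto
          rw [hre]
          exact Finset.sum_sdiff hNsub
        have hsumN : (∑ c ∈ ((new1.map (pvIdx st.length)).toFinset
                ∪ (new2.map (pvIdx st.length)).toFinset), cd.getD c 0)
            = (new1.map (fun x => cd.getD (pvIdx st.length x) 0)).sum
              + (new2.map (fun x => cd.getD (pvIdx st.length x) 0)).sum := by
          rw [Finset.sum_union hd12, List.sum_toFinset _ hnd1, List.sum_toFinset _ hnd2,
            List.map_map, List.map_map]
          rfl
        have hlist : (q''.map (fun x => cd.getD (pvIdx st.length x) 0)).sum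
            = (qt.map (fun x => cd.getD (pvIdx st.length x) 0)).sum
              + ((new1.map (fun x => cd.getD (pvIdx st.length x) 0)).sum
                + (new2.map (fun x => cd.getD (pvIdx st.length x) 0)).sum) := by
          rw [hq''eq]
          simp [List.map_append]
        rw [hlist, hcget]
        simp only [List.map_cons, List.sum_cons] at hsdiff ⊢
        linarith [hsdiff, hsumN]
      · -- STALE head: cur's cell is already collected and worth 0; the step is a no-op
        have hOwncur : OwnP st.length ib cb D (pvIdx st.length cur) := (hDready _ hcDin).1
        have hOpncur : OpnP st ks D (pvIdx st.length cur) := (hDready _ hcDin).2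
        have hnew1 : new1 = [] := by
          cases hxn : new1 with
          | nil => rfl
          | cons y ys =>
            exfalso
            have hy1 : y ∈ new1 := by rw [hxn]; exact List.mem_cons_self ..
            obtain ⟨hW, hst1, hbf⟩ := (hm1 (pvIdx st.length y)).mp ⟨y, hy1, rfl⟩
            obtain ⟨f0, f1⟩ := hL1r y (hsub1 y hy1)
            have hywlt : pvIdx st.length y < st.length := pvIdx_lt _ _ f0 f1
            have hOwny : OwnP st.length ib cb D (pvIdx st.length y) := by
              refine Or.inr ⟨pvIdx st.length cur, hcDin, ?_⟩
              rw [← hL1eq]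
              exact hW
            have := (hbc _ hywlt).mpr hOwny
            rw [hbf] at this
            exact Bool.false_ne_true this
        have hnew2 : new2 = [] := by
          cases hxn : new2 with
          | nil => rfl
          | cons y ys =>
            exfalso
            have hy2 : y ∈ new2 := by rw [hxn]; exact List.mem_cons_self ..
            obtain ⟨hW, hbx, hz0⟩ := (hm2 (pvIdx st.length y)).mp ⟨y, hy2, rfl⟩
            obtain ⟨f0, f1⟩ := hL2r y (hsub2 y hy2)
            have hywlt : pvIdx st.length y < st.length := pvIdx_lt _ _ f0 f1
            have hOpny : OpnP st ks D (pvIdx st.length y) := by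
              refine Or.inr ⟨pvIdx st.length cur, hcDin, ?_⟩
              rw [← hL2eq]
              exact hW
            exact ((hsc _ hywlt).mpr hOpny) hz0
        have hq''qt : q'' = qt := by rw [hq''eq, hnew1, hnew2]; simp
        have hinv' : InvA st cd ks cb ib D q'' boxes' status' := by
          refine ⟨c1.trans hbl, k1.trans hsl, ?_, ?_, ?_, ?_, hmin, hDlt, hDready⟩
          · intro i hi
            rw [c2 i]
            constructor
            · rintro (hb | hw)
              · exact (hbc i hi).mp hb
              · exact Or.inr ⟨pvIdx st.length cur, hcDin, by rw [← hL1eq]; exact hw⟩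
            · intro h
              exact Or.inl ((hbc i hi).mpr h)
          · intro i hi
            rw [k2 i]
            constructor
            · rintro (hb | hw)
              · exact (hsc i hi).mp hb
              · exact Or.inr ⟨pvIdx st.length cur, hcDin, by rw [← hL2eq]; exact hw⟩
            · intro h
              exact Or.inl ((hsc i hi).mpr h)
          · intro x hx
            rw [hq''qt] at hx
            exact hq x (List.mem_cons_of_mem _ hx)
          · intro i hi hiD hOwni hOpni
            obtain ⟨x, hxq, hwx⟩ := hcov i hi hiD hOwni hOpni
            rw [hq''qt]
            rcases List.mem_cons.mp hxq with rfl | hx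
            · exact absurd (hwx ▸ hcDin) hiD
            · exact ⟨x, hx, hwx⟩
        obtain ⟨C, hC1, hC2, hC3⟩ := ihM q'' boxes' status' (res + pvGetI cd cur) D
          (by simp only [List.length_cons] at hM; omega) hinv'
        refine ⟨C, hC1, hC2, ?_⟩
        rw [hC3, hq''qt]
        have hset : D ∪ ((cur :: qt).map (pvIdx st.length)).toFinset
            = D ∪ (qt.map (pvIdx st.length)).toFinset := by
          ext a
          simp only [List.map_cons, List.toFinset_cons, Finset.mem_union, Finset.mem_insert]
          constructor
          · rintro (h | (h | h))
            · exact Or.inl h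
            · exact Or.inl (h ▸ hcDin)
            · exact Or.inr h
          · rintro (h | h)
            · exact Or.inl h
            · exact Or.inr (Or.inr h)
        rw [hset, hcget]
        simp only [List.map_cons, List.sum_cons]
        ring

-- ---------- B side ----------

lemma foldSet_spec (L : List Int) (xs : List Bool)
    (hL : ∀ x ∈ L, -(xs.length : Int) ≤ x ∧ x < (xs.length : Int)) :
    (L.foldl (fun a c => pvSetB a c true) xs).length = xs.length ∧
    (∀ i : ℕ, ((L.foldl (fun a c => pvSetB a c true) xs).getD i false = true ↔
        xs.getD i false = true ∨ WMem xs.length L i)) := by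
  induction L generalizing xs with
  | nil =>
    refine ⟨rfl, fun i => ?_⟩
    simp [WMem_nil]
  | cons x rest ih =>
    obtain ⟨hx0, hxlt⟩ := hL x (List.mem_cons_self ..)
    have hwlt : pvIdx xs.length x < xs.length := pvIdx_lt _ _ hx0 hxlt
    have hset : pvSetB xs x true = xs.set (pvIdx xs.length x) true := rfl
    have hL' : ∀ y ∈ rest, -(((xs.set (pvIdx xs.length x) true).length : ℕ) : Int) ≤ y ∧
        y < (((xs.set (pvIdx xs.length x) true).length : ℕ) : Int) := by
      intro y hy; simpa using hL y (List.mem_cons_of_mem _ hy)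
    obtain ⟨ih1, ih2⟩ := ih (xs.set (pvIdx xs.length x) true) hL'
    simp only [List.length_set] at ih1 ih2
    refine ⟨by simp only [List.foldl_cons, hset]; rw [ih1], ?_⟩
    intro i
    simp only [List.foldl_cons, hset]
    rw [ih2 i, WMem_cons]
    by_cases hi : i = pvIdx xs.length x
    · constructor
      · intro _; exact Or.inr (Or.inl hi.symm)
      · intro _; exact Or.inl (by rw [hi]; exact getD_set_self _ _ _ _ hwlt)
    · rw [getD_set_ne _ _ _ _ _ hi]
      have hi' : ¬ (pvIdx xs.length x = i) := fun h => hi h.symm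
      tauto

def InvB (st cd : List Int) (ks cb : List (List Int)) (ib : List Int)
    (X : Int) (E : Finset ℕ) (opened owned collected : List Bool) (total : Int) : Prop :=
  opened.length = st.length ∧ owned.length = st.length ∧ collected.length = st.length ∧
  (∀ i : ℕ, i < st.length → (collected.getD i false = true ↔ i ∈ E)) ∧
  (∀ i : ℕ, i < st.length → (owned.getD i false = true ↔ OwnP st.length ib cb E i)) ∧
  (∀ i : ℕ, i < st.length → (opened.getD i false = true ↔ OpnP st ks E i)) ∧
  (∀ F, ClosedP st ib ks cb F → E ⊆ F) ∧
  (∀ b ∈ E, b < st.length) ∧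
  total = X + ∑ b ∈ E, cd.getD b 0

lemma bFold_spec (st cd : List Int) (ks cb : List (List Int)) (ib : List Int) (X : Int)
    (hks : ks.length = st.length) (hcb : cb.length = st.length)
    (hkr : ∀ l ∈ ks, ∀ x ∈ l, -(st.length : Int) ≤ x ∧ x < (st.length : Int))
    (hcr : ∀ l ∈ cb, ∀ x ∈ l, -(st.length : Int) ≤ x ∧ x < (st.length : Int)) :
    ∀ (L : List ℕ) (opened owned collected : List Bool) (total : Int) (changed : Bool)
      (E : Finset ℕ),
      (∀ b ∈ L, b < st.length) →
      InvB st cd ks cb ib X E opened owned collected total →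
      ∃ E' : Finset ℕ, E ⊆ E' ∧
        InvB st cd ks cb ib X E'
          (L.foldl (bBody cd ks cb) (opened, owned, collected, total, changed)).1
          (L.foldl (bBody cd ks cb) (opened, owned, collected, total, changed)).2.1
          (L.foldl (bBody cd ks cb) (opened, owned, collected, total, changed)).2.2.1
          (L.foldl (bBody cd ks cb) (opened, owned, collected, total, changed)).2.2.2.1 ∧
        ((L.foldl (bBody cd ks cb) (opened, owned, collected, total, changed))
              = (opened, owned, collected, total, changed) ∧ E' = E ∧
            (∀ b ∈ L, b ∈ E ∨ ¬ OwnP st.length ib cb E b ∨ ¬ OpnP st ks E b) ∨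
          ((L.foldl (bBody cd ks cb) (opened, owned, collected, total, changed)).2.2.2.2 = true ∧
            (L.foldl (bBody cd ks cb) (opened, owned, collected, total, changed)).2.2.1.count false
              < collected.count false)) := by
  intro L
  induction L with
  | nil =>
    intro opened owned collected total changed E _ hinv
    exact ⟨E, Finset.Subset.refl _, hinv, Or.inl ⟨rfl, rfl, by simp⟩⟩
  | cons b L' ih =>
    intro opened owned collected total changed E hL hinv
    obtain ⟨hol, hwl, hcl, hcc, hwc, hoc, hmin, hbnd, htot⟩ := hinv
    have hbn : b < st.length := hL b (List.mem_cons_self ..)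
    have hL' : ∀ x ∈ L', x < st.length := fun x hx => hL x (List.mem_cons_of_mem _ hx)
    by_cases hcond : (owned.getD b false && opened.getD b false && !collected.getD b false) = true
    · obtain ⟨hob, hpb, hncb⟩ : owned.getD b false = true ∧ opened.getD b false = true ∧
          collected.getD b false = false := by
        simp only [Bool.and_eq_true, Bool.not_eq_eq_eq_not, Bool.not_true] at hcond
        exact ⟨hcond.1.1, hcond.1.2, hcond.2⟩
      have hOwnb : OwnP st.length ib cb E b := (hwc b hbn).mp hob
      have hOpnb : OpnP st ks E b := (hoc b hbn).mp hpb
      have hbE : b ∉ E := fun hc => by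
        rw [(hcc b hbn).mpr hc] at hncb; exact Bool.true_eq_false ▸ hncb
      have hstep : (b :: L').foldl (bBody cd ks cb) (opened, owned, collected, total, changed)
          = L'.foldl (bBody cd ks cb)
              ((ks.getD b []).foldl (fun op k => pvSetB op k true) opened,
               (cb.getD b []).foldl (fun ow c => pvSetB ow c true) owned,
               collected.set b true,
               total + cd.getD b 0,
               true) := by
        simp only [List.foldl_cons, bBody, hcond, if_true]
      have hkmem : ks.getD b [] ∈ ks := by
        have hlt : b < ks.length := by omega
        rw [List.getD_eq_getElem?_getD, List.getElem?_eq_getElem hlt]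
        exact List.getElem_mem _
      have hcmem : cb.getD b [] ∈ cb := by
        have hlt : b < cb.length := by omega
        rw [List.getD_eq_getElem?_getD, List.getElem?_eq_getElem hlt]
        exact List.getElem_mem _
      have hkr' : ∀ x ∈ ks.getD b [], -(opened.length : Int) ≤ x ∧ x < (opened.length : Int) := by
        intro x hx
        obtain ⟨e0, e1⟩ := hkr _ hkmem x hx
        rw [hol]
        exact ⟨e0, e1⟩
      have hcr' : ∀ x ∈ cb.getD b [], -(owned.length : Int) ≤ x ∧ x < (owned.length : Int) := by
        intro x hx
        obtain ⟨e0, e1⟩ := hcr _ hcmem x hx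
        rw [hwl]
        exact ⟨e0, e1⟩
      obtain ⟨hfl1, hfc1⟩ := foldSet_spec (ks.getD b []) opened hkr'
      obtain ⟨hfl2, hfc2⟩ := foldSet_spec (cb.getD b []) owned hcr'
      rw [hol] at hfc1
      rw [hwl] at hfc2
      have hcount := count_false_set_true collected b (by omega)
      rw [hncb] at hcount
      simp at hcount
      have hinv1 : InvB st cd ks cb ib X (insert b E)
          ((ks.getD b []).foldl (fun op k => pvSetB op k true) opened)
          ((cb.getD b []).foldl (fun ow c => pvSetB ow c true) owned)
          (collected.set b true) (total + cd.getD b 0) := by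
        refine ⟨hfl1.trans hol, hfl2.trans hwl, by simp [hcl], ?_, ?_, ?_, ?_, ?_, ?_⟩
        · intro i hi
          by_cases hib : i = b
          · rw [hib, getD_set_self _ _ _ _ (by omega)]
            simp
          · rw [getD_set_ne _ _ _ _ _ hib, hcc i hi]
            simp [Finset.mem_insert, hib]
        · intro i hi
          rw [hfc2 i, hwc i hi, OwnP_insert]
        · intro i hi
          rw [hfc1 i, hoc i hi, OpnP_insert]
        · intro F hF
          refine Finset.insert_subset ?_ (hmin F hF)
          exact hF b hbn (OwnP_mono (hmin F hF) hOwnb) (OpnP_mono (hmin F hF) hOpnb)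
        · intro x hx
          rcases Finset.mem_insert.mp hx with rfl | hx'
          · exact hbn
          · exact hbnd x hx'
        · rw [htot, Finset.sum_insert hbE]
          ring
      obtain ⟨E'', hsub, hinv'', hdisj⟩ :=
        ih ((ks.getD b []).foldl (fun op k => pvSetB op k true) opened)
          ((cb.getD b []).foldl (fun ow c => pvSetB ow c true) owned)
          (collected.set b true) (total + cd.getD b 0) true (insert b E) hL' hinv1
      refine ⟨E'', (Finset.subset_insert _ _).trans hsub, by rw [hstep]; exact hinv'', ?_⟩
      rw [hstep]
      rcases hdisj with ⟨heq, _, _⟩ | ⟨hch, hlt⟩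
      · refine Or.inr ⟨?_, ?_⟩
        · rw [heq]
        · rw [heq]
          show (collected.set b true).count false < collected.count false
          omega
      · exact Or.inr ⟨hch, by omega⟩
    · have hstep : (b :: L').foldl (bBody cd ks cb) (opened, owned, collected, total, changed)
          = L'.foldl (bBody cd ks cb) (opened, owned, collected, total, changed) := by
        simp only [List.foldl_cons, bBody, hcond, if_false, Bool.false_eq_true]
      obtain ⟨E', hsub, hinv', hdisj⟩ :=
        ih opened owned collected total changed E hL'
          ⟨hol, hwl, hcl, hcc, hwc, hoc, hmin, hbnd, htot⟩
      refine ⟨E', hsub, by rw [hstep]; exact hinv', ?_⟩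
      rw [hstep]
      rcases hdisj with ⟨h1, h2, h3⟩ | h
      · refine Or.inl ⟨h1, h2, ?_⟩
        intro x hx
        rcases List.mem_cons.mp hx with rfl | hx'
        · by_cases hcb' : collected.getD x false = true
          · exact Or.inl ((hcc x hbn).mp hcb')
          · by_cases how : owned.getD x false = true
            · by_cases hop : opened.getD x false = true
              · have hcf : collected.getD x false = false := Bool.eq_false_iff.mpr hcb'
                exact absurd (by rw [how, hop, hcf]; rfl) hcond
              · exact Or.inr (Or.inr (fun hc => hop ((hoc x hbn).mpr hc)))
            · exact Or.inr (Or.inl (fun hc => how ((hwc x hbn).mpr hc)))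
        · exact h3 x hx'
      · exact Or.inr h

lemma bLoop_spec (st cd : List Int) (ks cb : List (List Int)) (ib : List Int) (X : Int)
    (hks : ks.length = st.length) (hcb : cb.length = st.length)
    (hkr : ∀ l ∈ ks, ∀ x ∈ l, -(st.length : Int) ≤ x ∧ x < (st.length : Int))
    (hcr : ∀ l ∈ cb, ∀ x ∈ l, -(st.length : Int) ≤ x ∧ x < (st.length : Int)) :
    ∀ (M : ℕ) (opened owned collected : List Bool) (total : Int) (E : Finset ℕ),
      collected.count false ≤ M →
      InvB st cd ks cb ib X E opened owned collected total →
      ∃ C : Finset ℕ, ClosedP st ib ks cb C ∧ (∀ F, ClosedP st ib ks cb F → C ⊆ F) ∧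
        bLoop cd ks cb st.length opened owned collected total = X + ∑ b ∈ C, cd.getD b 0 := by
  intro M
  induction M with
  | zero =>
    intro opened owned collected total E hM hinv
    obtain ⟨E', hsub, hinv', hdisj⟩ := bFold_spec st cd ks cb ib X hks hcb hkr hcr
      (List.range st.length) opened owned collected total false E
      (fun b hb => List.mem_range.mp hb) hinv
    rcases hdisj with ⟨heq, hEE, hclosed⟩ | ⟨hch, hlt⟩
    · obtain ⟨_, _, _, _, _, _, hmin, _, htot⟩ := hinv
      refine ⟨E, ?_, hmin, ?_⟩
      · intro i hi hOwn hOpn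
        rcases hclosed i (List.mem_range.mpr hi) with h | h | h
        · exact h
        · exact absurd hOwn h
        · exact absurd hOpn h
      · have hchb : (bPass cd ks cb st.length opened owned collected total)
            = (opened, owned, collected, total, false) := heq
        rw [bLoop.eq_def, hchb]
        exact htot
    · omega
  | succ M ihM =>
    intro opened owned collected total E hM hinv
    obtain ⟨E', hsub, hinv', hdisj⟩ := bFold_spec st cd ks cb ib X hks hcb hkr hcr
      (List.range st.length) opened owned collected total false E
      (fun b hb => List.mem_range.mp hb) hinv
    rcases hdisj with ⟨heq, hEE, hclosed⟩ | ⟨hch, hlt⟩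
    · obtain ⟨_, _, _, _, _, _, hmin, _, htot⟩ := hinv
      refine ⟨E, ?_, hmin, ?_⟩
      · intro i hi hOwn hOpn
        rcases hclosed i (List.mem_range.mpr hi) with h | h | h
        · exact h
        · exact absurd hOwn h
        · exact absurd hOpn h
      · have hchb : (bPass cd ks cb st.length opened owned collected total)
            = (opened, owned, collected, total, false) := heq
        rw [bLoop.eq_def, hchb]
        exact htot
    · have hchb : (bPass cd ks cb st.length opened owned collected total).2.2.2.2 = true := hch
      have hg : (bPass cd ks cb st.length opened owned collected total).2.2.1.count false
          < collected.count false := hlt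
      have hinv'' : InvB st cd ks cb ib X E'
          (bPass cd ks cb st.length opened owned collected total).1
          (bPass cd ks cb st.length opened owned collected total).2.1
          (bPass cd ks cb st.length opened owned collected total).2.2.1
          (bPass cd ks cb st.length opened owned collected total).2.2.2.1 := hinv'
      obtain ⟨C, hC1, hC2, hC3⟩ := ihM _ _ _ _ E' (by omega) hinv''
      refine ⟨C, hC1, hC2, ?_⟩
      rw [bLoop.eq_def, hchb]
      simp only [if_true]
      rw [dif_pos hg]
      exact hC3

-- ---------- seeding (B's receiving loop) ----------

lemma bSeed_spec (st cd : List Int) (ks cb : List (List Int))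
    (hcd : cd.length = st.length) (hks : ks.length = st.length) (hcb : cb.length = st.length)
    (hkr : ∀ l ∈ ks, ∀ x ∈ l, -(st.length : Int) ≤ x ∧ x < (st.length : Int))
    (hcr : ∀ l ∈ cb, ∀ x ∈ l, -(st.length : Int) ≤ x ∧ x < (st.length : Int)) :
    ∀ (L : List Int), (∀ x ∈ L, -(st.length : Int) ≤ x ∧ x < (st.length : Int)) →
    ∀ (opened owned emptied : List Bool) (total : Int),
      opened.length = st.length → owned.length = st.length → emptied.length = st.length →
      (bSeed st cd ks cb L opened owned emptied total).1.length = st.length ∧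
      (bSeed st cd ks cb L opened owned emptied total).2.1.length = st.length ∧
      (bSeed st cd ks cb L opened owned emptied total).2.2.1.length = st.length ∧
      (∀ i : ℕ, ((bSeed st cd ks cb L opened owned emptied total).2.2.1.getD i false = true ↔
          emptied.getD i false = true ∨
          WMem st.length (L.filter (fun x => decide (pvGetI st x ≠ 0))) i)) ∧
      (∀ i : ℕ, ((bSeed st cd ks cb L opened owned emptied total).2.1.getD i false = true ↔
          owned.getD i false = true ∨ WMem st.length L i ∨
          ∃ x ∈ L.filter (fun x => decide (pvGetI st x ≠ 0)),
            WMem st.length (cb.getD (pvIdx st.length x) []) i)) ∧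
      (∀ i : ℕ, ((bSeed st cd ks cb L opened owned emptied total).1.getD i false = true ↔
          opened.getD i false = true ∨
          ∃ x ∈ L.filter (fun x => decide (pvGetI st x ≠ 0)),
            WMem st.length (ks.getD (pvIdx st.length x) []) i)) ∧
      (bSeed st cd ks cb L opened owned emptied total).2.2.2
        = total + ((L.filter (fun x => decide (pvGetI st x ≠ 0))).map
            (fun x => cd.getD (pvIdx st.length x) 0)).sum := by
  intro L
  induction L with
  | nil =>
    intro _ opened owned emptied total hol hwl hel
    refine ⟨hol, hwl, hel, ?_, ?_, ?_, by simp [bSeed]⟩ <;>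
      intro i <;> simp [bSeed, WMem_nil]
  | cons a rest ih =>
    intro hL opened owned emptied total hol hwl hel
    obtain ⟨ha0, halt⟩ := hL a (List.mem_cons_self ..)
    have hawlt : pvIdx st.length a < st.length := pvIdx_lt _ _ ha0 halt
    have hGcd : pvGetI cd a = cd.getD (pvIdx st.length a) 0 := by unfold pvGetI; rw [hcd]
    have hL1eq : pvGetL cb a = cb.getD (pvIdx st.length a) [] := by unfold pvGetL; rw [hcb]
    have hL2eq : pvGetL ks a = ks.getD (pvIdx st.length a) [] := by unfold pvGetL; rw [hks]
    have hrest : ∀ x ∈ rest, -(st.length : Int) ≤ x ∧ x < (st.length : Int) :=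
      fun x hx => hL x (List.mem_cons_of_mem _ hx)
    have hsetw : pvSetB owned a true = owned.set (pvIdx st.length a) true := by
      unfold pvSetB; rw [hwl]
    have hsete : pvSetB emptied a true = emptied.set (pvIdx st.length a) true := by
      unfold pvSetB; rw [hel]
    have hownset : ∀ i : ℕ, ((pvSetB owned a true).getD i false = true ↔
        owned.getD i false = true ∨ i = pvIdx st.length a) := by
      intro i
      rw [hsetw]
      by_cases hi : i = pvIdx st.length a
      · subst hi
        rw [getD_set_self _ _ _ _ (by omega)]
        simp
      · rw [getD_set_ne _ _ _ _ _ hi]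
        simp [hi]
    have hempset : ∀ i : ℕ, ((pvSetB emptied a true).getD i false = true ↔
        emptied.getD i false = true ∨ i = pvIdx st.length a) := by
      intro i
      rw [hsete]
      by_cases hi : i = pvIdx st.length a
      · subst hi
        rw [getD_set_self _ _ _ _ (by omega)]
        simp
      · rw [getD_set_ne _ _ _ _ _ hi]
        simp [hi]
    by_cases hcond : pvGetI st a ≠ 0
    · have hstep : bSeed st cd ks cb (a :: rest) opened owned emptied total
          = bSeed st cd ks cb rest
              ((pvGetL ks a).foldl (fun op k => pvSetB op k true) opened)
              ((pvGetL cb a).foldl (fun ow c => pvSetB ow c true) (pvSetB owned a true))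
              (pvSetB emptied a true)
              (total + pvGetI cd a) := by
        simp only [bSeed, if_pos hcond]
      have hfilt : (a :: rest).filter (fun x => decide (pvGetI st x ≠ 0))
          = a :: rest.filter (fun x => decide (pvGetI st x ≠ 0)) := by
        simp [List.filter_cons, hcond]
      have hksmem : pvGetL ks a ∈ ks := by
        rw [hL2eq]
        have hlt' : pvIdx st.length a < ks.length := by omega
        rw [List.getD_eq_getElem?_getD, List.getElem?_eq_getElem hlt']
        exact List.getElem_mem _
      have hcbmem : pvGetL cb a ∈ cb := by
        rw [hL1eq]
        have hlt' : pvIdx st.length a < cb.length := by omega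
        rw [List.getD_eq_getElem?_getD, List.getElem?_eq_getElem hlt']
        exact List.getElem_mem _
      have hkr' : ∀ x ∈ pvGetL ks a,
          -(opened.length : Int) ≤ x ∧ x < (opened.length : Int) := by
        intro x hx
        rw [hol]
        exact hkr _ hksmem x hx
      obtain ⟨hflK, hfcK⟩ := foldSet_spec (pvGetL ks a) opened hkr'
      have hwl' : (pvSetB owned a true).length = st.length := by rw [hsetw]; simp [hwl]
      have hcr' : ∀ x ∈ pvGetL cb a,
          -((pvSetB owned a true).length : Int) ≤ x ∧
            x < ((pvSetB owned a true).length : Int) := by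
        intro x hx
        rw [hwl']
        exact hcr _ hcbmem x hx
      obtain ⟨hflC, hfcC⟩ := foldSet_spec (pvGetL cb a) (pvSetB owned a true) hcr'
      rw [hol] at hfcK
      rw [hwl'] at hfcC
      obtain ⟨j1, j2, j3, j4, j5, j6, j7⟩ := ih hrest
        ((pvGetL ks a).foldl (fun op k => pvSetB op k true) opened)
        ((pvGetL cb a).foldl (fun ow c => pvSetB ow c true) (pvSetB owned a true))
        (pvSetB emptied a true) (total + pvGetI cd a)
        (hflK.trans hol) (hflC.trans hwl') (by rw [hsete]; simp [hel])
      rw [hstep]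
      refine ⟨j1, j2, j3, ?_, ?_, ?_, ?_⟩
      · intro i
        rw [j4 i, hempset i, hfilt, WMem_cons]
        constructor
        · rintro ((h | h) | h)
          · exact Or.inl h
          · exact Or.inr (Or.inl h.symm)
          · exact Or.inr (Or.inr h)
        · rintro (h | (h | h))
          · exact Or.inl (Or.inl h)
          · exact Or.inl (Or.inr h.symm)
          · exact Or.inr h
      · intro i
        rw [j5 i, hfcC i, hownset i, hfilt, WMem_cons]
        constructor
        · rintro (((h | h) | h) | (h | ⟨x, hx, hw⟩))
          · exact Or.inl h
          · exact Or.inr (Or.inl (Or.inl h.symm))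
          · exact Or.inr (Or.inr ⟨a, List.mem_cons_self .., by rw [← hL1eq]; exact h⟩)
          · exact Or.inr (Or.inl (Or.inr h))
          · refine Or.inr (Or.inr ⟨x, List.mem_cons_of_mem _ hx, hw⟩)
        · rintro (h | ((h | h) | ⟨x, hx, hw⟩))
          · exact Or.inl (Or.inl (Or.inl h))
          · exact Or.inl (Or.inl (Or.inr h.symm))
          · exact Or.inr (Or.inl h)
          · rcases List.mem_cons.mp hx with rfl | hx'
            · exact Or.inl (Or.inr (by rw [hL1eq]; exact hw))
            · exact Or.inr (Or.inr ⟨x, hx', hw⟩)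
      · intro i
        rw [j6 i, hfcK i, hfilt]
        constructor
        · rintro ((h | h) | ⟨x, hx, hw⟩)
          · exact Or.inl h
          · exact Or.inr ⟨a, List.mem_cons_self .., by rw [← hL2eq]; exact h⟩
          · exact Or.inr ⟨x, List.mem_cons_of_mem _ hx, hw⟩
        · rintro (h | ⟨x, hx, hw⟩)
          · exact Or.inl (Or.inl h)
          · rcases List.mem_cons.mp hx with rfl | hx'
            · exact Or.inl (Or.inr (by rw [hL2eq]; exact hw))
            · exact Or.inr ⟨x, hx', hw⟩
      · rw [j7, hfilt, hGcd]
        simp only [List.map_cons, List.sum_cons]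
        ring
    · have hstep : bSeed st cd ks cb (a :: rest) opened owned emptied total
          = bSeed st cd ks cb rest opened (pvSetB owned a true) emptied total := by
        simp only [bSeed, hcond]
        simp
      have hfilt : (a :: rest).filter (fun x => decide (pvGetI st x ≠ 0))
          = rest.filter (fun x => decide (pvGetI st x ≠ 0)) := by
        simp [List.filter_cons, hcond]
      obtain ⟨j1, j2, j3, j4, j5, j6, j7⟩ := ih hrest
        opened (pvSetB owned a true) emptied total
        hol (by rw [hsetw]; simp [hwl]) hel
      rw [hstep]
      refine ⟨j1, j2, j3, ?_, ?_, ?_, ?_⟩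
      · intro i
        rw [j4 i, hfilt]
      · intro i
        rw [j5 i, hownset i, hfilt, WMem_cons]
        constructor
        · rintro ((h | h) | (h | h))
          · exact Or.inl h
          · exact Or.inr (Or.inl (Or.inl h.symm))
          · exact Or.inr (Or.inl (Or.inr h))
          · exact Or.inr (Or.inr h)
        · rintro (h | ((h | h) | h))
          · exact Or.inl (Or.inl h)
          · exact Or.inl (Or.inr h.symm)
          · exact Or.inr (Or.inl h)
          · exact Or.inr (Or.inr h)
      · intro i
        rw [j6 i, hfilt]
      · rw [j7, hfilt]

-- ---------- assembly ----------

lemma maxCandies_eq_sum (st cd : List Int) (ks cb : List (List Int)) (ib : List Int)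
    (pre : PreWF_maxCandies st cd ks cb ib) :
    ∃ C : Finset ℕ, ClosedP st ib ks cb C ∧ (∀ F, ClosedP st ib ks cb F → C ⊆ F) ∧
      maxCandies st cd ks cb ib
        = ((ib.filter (fun x => decide (pvGetI st x ≠ 0))).map
              (fun x => cd.getD (pvIdx st.length x) 0)).sum
          + ∑ c ∈ C \ ((ib.filter (fun x => decide (pvGetI st x ≠ 0))).map
              (pvIdx st.length)).toFinset, cd.getD c 0 := by
  obtain ⟨hcd, hks, hcb, hibr, hkr, hcr⟩ := pre
  have hibr' : ∀ x ∈ ib, -((List.replicate st.length false : List Bool).length : Int) ≤ x ∧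
      x < ((List.replicate st.length false : List Bool).length : Int) := by
    intro x hx
    simpa using hibr x hx
  obtain ⟨i1, i2, i3⟩ := aInit_spec st ib (List.replicate st.length false) [] hibr'
  simp only [List.length_replicate] at i1 i2
  rw [List.nil_append] at i3
  have hgetI : ∀ x : Int, pvGetI st x = st.getD (pvIdx st.length x) 0 := fun x => rfl
  have hinv0 : InvA st cd ks cb ib ∅
      (aInit st ib (List.replicate st.length false) []).2
      (aInit st ib (List.replicate st.length false) []).1 st := by
    refine ⟨by rw [i1], rfl, ?_, ?_, ?_, ?_, ?_, ?_, ?_⟩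
    · intro i hi
      rw [i2 i]
      simp [OwnP, getD_replicate_false]
    · intro i hi
      simp [OpnP]
    · intro x hx
      rw [i3] at hx
      obtain ⟨hxib, hpx⟩ := List.mem_filter.mp hx
      obtain ⟨e0, e1⟩ := hibr x hxib
      refine ⟨e0, e1, Or.inl ⟨by simp, Or.inl ⟨x, hxib, rfl⟩, Or.inl ?_⟩⟩
      rw [← hgetI x]
      exact of_decide_eq_true hpx
    · intro i hi _ hOwn hOpn
      rw [i3]
      have hib : WMem st.length ib i := by
        rcases hOwn with h | ⟨b, hb, _⟩
        · exact h
        · exact absurd hb (Finset.notMem_empty b)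
      obtain ⟨x, hxib, hwx⟩ := hib
      refine ⟨x, List.mem_filter.mpr ⟨hxib, decide_eq_true ?_⟩, hwx⟩
      rw [hgetI x, hwx]
      rcases hOpn with h | ⟨b, hb, _⟩
      · exact h
      · exact absurd hb (Finset.notMem_empty b)
    · intro F _
      exact Finset.empty_subset F
    · intro b hb
      exact absurd hb (Finset.notMem_empty b)
    · intro b hb
      exact absurd hb (Finset.notMem_empty b)
  obtain ⟨C, hC1, hC2, hC3⟩ := aLoop_spec st cd ks cb ib hks hcb hcd hkr hcr
    ((aInit st ib (List.replicate st.length false) []).2.length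
      + 2 * (aInit st ib (List.replicate st.length false) []).1.count false
      + 2 * st.countP (fun s => s == 0))
    (aInit st ib (List.replicate st.length false) []).2
    (aInit st ib (List.replicate st.length false) []).1 st 0 ∅ (le_refl _) hinv0
  refine ⟨C, hC1, hC2, ?_⟩
  show aLoop cd ks cb (aInit st ib (List.replicate st.length false) []).2
      (aInit st ib (List.replicate st.length false) []).1 st 0 = _
  rw [hC3, i3]
  simp

lemma maxCandies_alt_eq_sum (st cd : List Int) (ks cb : List (List Int)) (ib : List Int)
    (pre : PreWF_maxCandies st cd ks cb ib) :
    ∃ C : Finset ℕ, ClosedP st ib ks cb C ∧ (∀ F, ClosedP st ib ks cb F → C ⊆ F) ∧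
      maxCandies_alt st cd ks cb ib
        = ((ib.filter (fun x => decide (pvGetI st x ≠ 0))).map
              (fun x => cd.getD (pvIdx st.length x) 0)).sum
          - (∑ c ∈ ((ib.filter (fun x => decide (pvGetI st x ≠ 0))).map
              (pvIdx st.length)).toFinset, cd.getD c 0)
          + ∑ c ∈ C, cd.getD c 0 := by
  obtain ⟨hcd, hks, hcb, hibr, hkr, hcr⟩ := pre
  have hgetI : ∀ x : Int, pvGetI st x = st.getD (pvIdx st.length x) 0 := fun x => rfl
  obtain ⟨j1, j2, j3, j4, j5, j6, j7⟩ := bSeed_spec st cd ks cb hcd hks hcb hkr hcr ib hibr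
    (st.map (fun s => s != 0)) (List.replicate st.length false)
    (List.replicate st.length false) 0 (by simp) (by simp) (by simp)
  have hmap : ∀ i : ℕ, i < st.length →
      (st.map (fun s => s != 0)).getD i false = (st.getD i 0 != 0) := by
    intro i hi
    rw [List.getD_eq_getElem?_getD, List.getD_eq_getElem?_getD, List.getElem?_map,
      List.getElem?_eq_getElem hi]
    simp
  have hF0 : ∀ i : ℕ, (i ∈ ((ib.filter (fun x => decide (pvGetI st x ≠ 0))).map
        (pvIdx st.length)).toFinset ↔
      WMem st.length (ib.filter (fun x => decide (pvGetI st x ≠ 0))) i) := by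
    intro i
    rw [List.mem_toFinset, List.mem_map]
    constructor
    · rintro ⟨x, hx, hw⟩
      exact ⟨x, hx, hw⟩
    · rintro ⟨x, hx, hw⟩
      exact ⟨x, hx, hw⟩
  have hinv0 : InvB st cd ks cb ib
      (((ib.filter (fun x => decide (pvGetI st x ≠ 0))).map
          (fun x => cd.getD (pvIdx st.length x) 0)).sum
        - ∑ c ∈ ((ib.filter (fun x => decide (pvGetI st x ≠ 0))).map
            (pvIdx st.length)).toFinset, cd.getD c 0)
      (((ib.filter (fun x => decide (pvGetI st x ≠ 0))).map (pvIdx st.length)).toFinset)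
      (bSeed st cd ks cb ib (st.map (fun s => s != 0))
        (List.replicate st.length false) (List.replicate st.length false) 0).1
      (bSeed st cd ks cb ib (st.map (fun s => s != 0))
        (List.replicate st.length false) (List.replicate st.length false) 0).2.1
      (bSeed st cd ks cb ib (st.map (fun s => s != 0))
        (List.replicate st.length false) (List.replicate st.length false) 0).2.2.1
      (bSeed st cd ks cb ib (st.map (fun s => s != 0))
        (List.replicate st.length false) (List.replicate st.length false) 0).2.2.2 := by
    refine ⟨j1, j2, j3, ?_, ?_, ?_, ?_, ?_, ?_⟩
    · intro i hi
      rw [j4 i, hF0 i, getD_replicate_false]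
      simp
    · intro i hi
      rw [j5 i]
      rw [getD_replicate_false]
      unfold OwnP
      constructor
      · rintro (h | (h | ⟨x, hx, hw⟩))
        · exact absurd h (by simp)
        · exact Or.inl h
        · refine Or.inr ⟨pvIdx st.length x, ?_, hw⟩
          rw [hF0]
          exact ⟨x, hx, rfl⟩
      · rintro (h | ⟨b, hb, hw⟩)
        · exact Or.inr (Or.inl h)
        · rw [hF0] at hb
          obtain ⟨x, hx, hwx⟩ := hb
          exact Or.inr (Or.inr ⟨x, hx, by rw [hwx]; exact hw⟩)
    · intro i hi
      rw [j6 i, hmap i hi]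
      unfold OpnP
      constructor
      · rintro (h | ⟨x, hx, hw⟩)
        · exact Or.inl (by simpa using h)
        · refine Or.inr ⟨pvIdx st.length x, ?_, hw⟩
          rw [hF0]
          exact ⟨x, hx, rfl⟩
      · rintro (h | ⟨b, hb, hw⟩)
        · exact Or.inl (by simpa using h)
        · rw [hF0] at hb
          obtain ⟨x, hx, hwx⟩ := hb
          exact Or.inr ⟨x, hx, by rw [hwx]; exact hw⟩
    · intro F hF
      intro b hb
      rw [hF0] at hb
      obtain ⟨x, hx, hwx⟩ := hb
      obtain ⟨hxib, hpx⟩ := List.mem_filter.mp hx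
      obtain ⟨e0, e1⟩ := hibr x hxib
      have hblt : b < st.length := by rw [← hwx]; exact pvIdx_lt _ _ e0 e1
      refine hF b hblt (Or.inl ⟨x, hxib, hwx⟩) (Or.inl ?_)
      rw [← hwx, ← hgetI x]
      exact of_decide_eq_true hpx
    · intro b hb
      rw [hF0] at hb
      obtain ⟨x, hx, hwx⟩ := hb
      obtain ⟨hxib, _⟩ := List.mem_filter.mp hx
      obtain ⟨e0, e1⟩ := hibr x hxib
      rw [← hwx]
      exact pvIdx_lt _ _ e0 e1
    · rw [j7]
      ring
  obtain ⟨C, hC1, hC2, hC3⟩ := bLoop_spec st cd ks cb ib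
    (((ib.filter (fun x => decide (pvGetI st x ≠ 0))).map
        (fun x => cd.getD (pvIdx st.length x) 0)).sum
      - ∑ c ∈ ((ib.filter (fun x => decide (pvGetI st x ≠ 0))).map
          (pvIdx st.length)).toFinset, cd.getD c 0)
    hks hcb hkr hcr
    ((bSeed st cd ks cb ib (st.map (fun s => s != 0))
        (List.replicate st.length false) (List.replicate st.length false) 0).2.2.1.count false)
    _ _ _ _ _ (le_refl _) hinv0
  refine ⟨C, hC1, hC2, ?_⟩
  show bLoop cd ks cb st.length _ _ _ _ = _
  rw [hC3]

lemma aInit_q_id (status : List Int) (L : List Int) (boxes : List Bool) (q : List Int)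
    (h : ∀ x ∈ L, pvGetI status x = 0) : (aInit status L boxes q).2 = q := by
  induction L generalizing boxes q with
  | nil => rfl
  | cons x rest ih =>
    have hx : pvGetI status x = 0 := h x (List.mem_cons_self ..)
    simp only [aInit, hx, ne_eq, not_true_eq_false, if_neg, if_false]
    exact ih _ _ (fun y hy => h y (List.mem_cons_of_mem _ hy))

lemma maxCandies_trivial (st cd : List Int) (ks cb : List (List Int)) (ib : List Int)
    (htriv : PreTrivial_maxCandies st cd ks cb ib) : maxCandies st cd ks cb ib = 0 := by
  have hq : (aInit st ib (List.replicate st.length false) []).2 = [] := by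
    apply aInit_q_id
    intro x hx
    obtain ⟨_, _, hz⟩ := htriv x hx
    exact hz
  show aLoop cd ks cb (aInit st ib (List.replicate st.length false) []).2
      (aInit st ib (List.replicate st.length false) []).1 st 0 = 0
  rw [hq, aLoop.eq_def]

lemma bSeed_trivial (st cd : List Int) (ks cb : List (List Int)) (L : List Int)
    (opened owned emptied : List Bool) (total : Int)
    (h : ∀ x ∈ L, pvGetI st x = 0) :
    bSeed st cd ks cb L opened owned emptied total
      = (opened, L.foldl (fun a c => pvSetB a c true) owned, emptied, total) := by
  induction L generalizing owned with
  | nil => rfl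
  | cons x rest ih =>
    have hx : pvGetI st x = 0 := h x (List.mem_cons_self ..)
    simp only [bSeed, hx, ne_eq, not_true_eq_false, if_false, List.foldl_cons]
    exact ih _ (fun y hy => h y (List.mem_cons_of_mem _ hy))

lemma bFold_id (cd : List Int) (ks cb : List (List Int)) (L : List ℕ)
    (opened owned collected : List Bool) (total : Int) (changed : Bool)
    (h : ∀ b ∈ L, ¬ ((owned.getD b false && opened.getD b false && !collected.getD b false) = true)) :
    L.foldl (bBody cd ks cb) (opened, owned, collected, total, changed)
      = (opened, owned, collected, total, changed) := by
  induction L with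
  | nil => rfl
  | cons b rest ih =>
    have hb := h b (List.mem_cons_self ..)
    simp only [List.foldl_cons, bBody, if_neg hb]
    exact ih (fun y hy => h y (List.mem_cons_of_mem _ hy))

lemma maxCandies_alt_trivial (st cd : List Int) (ks cb : List (List Int)) (ib : List Int)
    (htriv : PreTrivial_maxCandies st cd ks cb ib) : maxCandies_alt st cd ks cb ib = 0 := by
  have hz : ∀ x ∈ ib, pvGetI st x = 0 := by
    intro x hx
    obtain ⟨_, _, h⟩ := htriv x hx
    exact h
  have hseed := bSeed_trivial st cd ks cb ib (st.map (fun s => s != 0))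
    (List.replicate st.length false) (List.replicate st.length false) 0 hz
  have hibr' : ∀ x ∈ ib,
      -((List.replicate st.length false : List Bool).length : Int) ≤ x ∧
        x < ((List.replicate st.length false : List Bool).length : Int) := by
    intro x hx
    obtain ⟨h0, h1, _⟩ := htriv x hx
    simpa using ⟨h0, h1⟩
  obtain ⟨hwlen, hwmem⟩ := foldSet_spec ib (List.replicate st.length false) hibr'
  simp only [List.length_replicate] at hwlen hwmem
  show bLoop cd ks cb st.length
      (bSeed st cd ks cb ib (st.map (fun s => s != 0))
        (List.replicate st.length false) (List.replicate st.length false) 0).1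
      (bSeed st cd ks cb ib (st.map (fun s => s != 0))
        (List.replicate st.length false) (List.replicate st.length false) 0).2.1
      (bSeed st cd ks cb ib (st.map (fun s => s != 0))
        (List.replicate st.length false) (List.replicate st.length false) 0).2.2.1
      (bSeed st cd ks cb ib (st.map (fun s => s != 0))
        (List.replicate st.length false) (List.replicate st.length false) 0).2.2.2 = 0
  rw [hseed]
  have hid : bPass cd ks cb st.length (st.map (fun s => s != 0))
      (ib.foldl (fun a c => pvSetB a c true) (List.replicate st.length false))
      (List.replicate st.length false) 0
      = (st.map (fun s => s != 0),
          ib.foldl (fun a c => pvSetB a c true) (List.replicate st.length false),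
          List.replicate st.length false, 0, false) := by
    apply bFold_id
    intro b hb
    have hbn : b < st.length := List.mem_range.mp hb
    intro hcond
    obtain ⟨how, hop⟩ : (ib.foldl (fun a c => pvSetB a c true)
          (List.replicate st.length false)).getD b false = true ∧
        (st.map (fun s => s != 0)).getD b false = true := by
      simp only [Bool.and_eq_true] at hcond
      exact ⟨hcond.1.1, hcond.1.2⟩
    rcases (hwmem b).mp how with h' | h'
    · rw [getD_replicate_false] at h'
      exact Bool.false_ne_true h'
    · obtain ⟨x, hxib, hwx⟩ := h'
      obtain ⟨_, _, hz'⟩ := htriv x hxib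
      rw [hwx] at hz'
      have hmap : (st.map (fun s => s != 0)).getD b false = (st.getD b 0 != 0) := by
        rw [List.getD_eq_getElem?_getD, List.getD_eq_getElem?_getD, List.getElem?_map,
          List.getElem?_eq_getElem hbn]
        simp
      rw [hmap, hz'] at hop
      simp at hop
  rw [bLoop.eq_def, hid]
  simp

-- ===== VERDICT (by name: the statement is the Claim_ definition above) =====
theorem maxCandies_spec : Claim_equal_maxCandies := by
  intro st cd ks cb ib _dom pre
  show maxCandies st cd ks cb ib = maxCandies_alt st cd ks cb ib
  rcases pre with hwf | htriv
  · obtain ⟨C1, hc1, hm1, he1⟩ := maxCandies_eq_sum st cd ks cb ib hwf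
    obtain ⟨C2, hc2, hm2, he2⟩ := maxCandies_alt_eq_sum st cd ks cb ib hwf
    have hC : C1 = C2 := Finset.Subset.antisymm (hm1 _ hc2) (hm2 _ hc1)
    subst hC
    have hsub : ((ib.filter (fun x => decide (pvGetI st x ≠ 0))).map
        (pvIdx st.length)).toFinset ⊆ C1 := by
      intro b hb
      obtain ⟨x, hx, hwx⟩ := List.mem_map.mp (List.mem_toFinset.mp hb)
      obtain ⟨hxib, hpx⟩ := List.mem_filter.mp hx
      obtain ⟨hcd, hks', hcb', hibr, _, _⟩ := hwf
      obtain ⟨e0, e1⟩ := hibr x hxib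
      have hblt : b < st.length := by rw [← hwx]; exact pvIdx_lt _ _ e0 e1
      refine hc1 b hblt (Or.inl ⟨x, hxib, hwx⟩) (Or.inl ?_)
      rw [← hwx]
      exact of_decide_eq_true hpx
    have hsd := Finset.sum_sdiff (f := fun c => cd.getD c 0) hsub
    rw [he1, he2]
    linarith [hsd]
  · rw [maxCandies_trivial st cd ks cb ib htriv, maxCandies_alt_trivial st cd ks cb ib htriv]
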